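-- pv_equiv track=rewrite | github.com/davidiach/erdos97 | src/erdos97/n8_independent_obstruction.py | cyclic_order_kill
-- ===== SOURCE A (Python) =====
-- from collections import defaultdict, deque
-- from itertools import combinations, permutations
-- from typing import Iterable, Sequence
--
-- N = 8
--
-- def witnesses_of(rows: Sequence[Sequence[int]], i: int) -> list[int]:
--     return [j for j, value in enumerate(rows[i]) if value]
--
-- def phi_edges(rows: Sequence[Sequence[int]]) -> list[tuple[tuple[int, int], tuple[int, int]]]:
--     w = [set(witnesses_of(rows, i)) for i in range(N)]
--     edges = []
--     for i in range(N):
--         for j in range(i + 1, N):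
--             inter = sorted(w[i] & w[j])
--             if len(inter) == 2:
--                 edges.append(((i, j), (inter[0], inter[1])))
--     return edges
--
-- def _normalized_orders() -> Iterable[tuple[int, ...]]:
--     for tail in permutations(range(1, N)):
--         order = (0,) + tail
--         if order[1] < order[-1]:
--             yield order
--
-- def _crosses(c1: tuple[int, int], c2: tuple[int, int], pos: dict[int, int]) -> bool:
--     a, b = c1
--     c, d = c2
--     if len({a, b, c, d}) < 4:
--         return False
--     pa, pb, pc, pd = pos[a], pos[b], pos[c], pos[d]
--     if pa > pb:
--         pa, pb = pb, pa
--     cin = pa < pc < pb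
--     din = pa < pd < pb
--     return cin != din
--
-- def _forced_perp_color(rows: Sequence[Sequence[int]]) -> tuple[bool, list[list[tuple[int, int]]]]:
--     """Bipartition the forced-perpendicularity graph; return same-color classes."""
--     graph: dict[tuple[int, int], set[tuple[int, int]]] = defaultdict(set)
--     for src, tgt in phi_edges(rows):
--         graph[src].add(tgt)
--         graph[tgt].add(src)
--     chords = [(a, b) for a in range(N) for b in range(a + 1, N)]
--     color: dict[tuple[int, int], int] = {}
--     same_color_classes: list[list[tuple[int, int]]] = []
--     for start in chords:
--         if start in color:
--             continue
--         color[start] = 0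
--         component = [start]
--         q = deque([start])
--         bipartite = True
--         while q:
--             u = q.popleft()
--             for v in graph[u]:
--                 if v not in color:
--                     color[v] = 1 - color[u]
--                     component.append(v)
--                     q.append(v)
--                 elif color[v] == color[u]:
--                     bipartite = False
--         if not bipartite:
--             return False, []
--         bucket: dict[int, list[tuple[int, int]]] = defaultdict(list)
--         for c in component:
--             bucket[color[c]].append(c)
--         for cls in bucket.values():
--             if len(cls) >= 2:
--                 same_color_classes.append(sorted(cls))
--     return True, same_color_classes
--
-- def cyclic_order_kill(rows: Sequence[Sequence[int]]) -> bool: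
--     """Return True iff no cyclic order is compatible with the perpendicularity classes."""
--     bipartite, same_color_classes = _forced_perp_color(rows)
--     if not bipartite:
--         return True
--     for order in _normalized_orders():
--         pos = {label: idx for idx, label in enumerate(order)}
--         ok = True
--         for cls in same_color_classes:
--             used: set[int] = set()
--             for a, b in cls:
--                 if a in used or b in used:
--                     ok = False
--                     break
--                 used.add(a)
--                 used.add(b)
--             if not ok:
--                 break
--             for left, right in combinations(cls, 2):
--                 if _crosses(left, right, pos):
--                     ok = False
--                     break
--             if not ok:
--                 break
--         if ok:
--             return False
--     return True
-- ===== SOURCE B (Python) =====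
-- from itertools import permutations
--
--
-- def cyclic_order_kill(rows):
--     # forced-perpendicularity edges, by a filtered column scan per row pair
--     edges = []
--     for i in range(8):
--         ri = rows[i]
--         for j in range(i + 1, 8):
--             rj = rows[j]
--             common = [k for k in range(min(len(ri), len(rj))) if ri[k] and rj[k]]
--             if len(common) == 2:
--                 edges.append(((i, j), (common[0], common[1])))
--     # parity-reachability closure over the chords touched by an edge:
--     # (u, w) in even/odd  <=>  a walk of even/odd length from u to w exists
--     sym = edges + [(t, s) for (s, t) in edges]
--     verts = sorted({v for e in sym for v in e})
--     even = {(v, v) for v in verts}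
--     odd = set()
--     while True:
--         changed = False
--         for (u, v) in sym:
--             for w in verts:
--                 if (v, w) in even and (u, w) not in odd:
--                     odd.add((u, w))
--                     changed = True
--                 if (v, w) in odd and (u, w) not in even:
--                     even.add((u, w))
--                     changed = True
--         if not changed:
--             break
--     # an odd closed walk = the perpendicularity graph is not 2-colorable
--     if any((v, v) in odd for v in verts):
--         return True
--     # chords forced to the same color = evenly-connected pairs; no classes built
--     pairs = [(u, v) for u in verts for v in verts if u < v and (u, v) in even]
--     for tail in permutations(range(1, 8)):
--         if tail[0] > tail[-1]:
--             continue
--         order = (0,) + tail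
--         pos = {lab: idx for idx, lab in enumerate(order)}
--         ok = True
--         for (a, b), (c, d) in pairs:
--             if len({a, b, c, d}) < 4:
--                 ok = False
--                 break
--             pa, pb = sorted((pos[a], pos[b]))
--             pc, pd = sorted((pos[c], pos[d]))
--             if pa < pc < pb < pd or pc < pa < pd < pb:
--                 ok = False
--                 break
--         if ok:
--             return False
--     return True
-- ===== Notes on version B (the rewrite author's own statement) =====
-- stated objective: alternative
-- what changed: The BFS 2-coloring over components and the same-color-class grouping are replaced by a parity-reachability transitive closure (fixpoint relaxation of even/odd walk pairs over the edge list) followed by an odd-self-loop test for non-bipartiteness and a pairwise check over the evenly-connected chord pairs, so no traversal, no color dict and no classes are ever built; the edge construction uses a filtered column scan per row pair instead of set intersections.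
import Mathlib
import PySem

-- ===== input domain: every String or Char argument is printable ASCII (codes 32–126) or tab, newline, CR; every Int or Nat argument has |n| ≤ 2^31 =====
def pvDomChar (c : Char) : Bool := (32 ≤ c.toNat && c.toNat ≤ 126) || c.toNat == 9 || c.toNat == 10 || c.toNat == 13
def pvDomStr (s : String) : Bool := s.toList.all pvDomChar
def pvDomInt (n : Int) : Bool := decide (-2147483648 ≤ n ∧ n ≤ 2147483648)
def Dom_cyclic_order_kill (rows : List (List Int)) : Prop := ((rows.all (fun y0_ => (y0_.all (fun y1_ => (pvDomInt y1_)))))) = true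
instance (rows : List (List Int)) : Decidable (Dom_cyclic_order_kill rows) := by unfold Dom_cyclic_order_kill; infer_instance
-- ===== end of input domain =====

-- ===== PORT A =====
-- B replaces A's BFS 2-coloring and same-color-class grouping by a parity-reachability
-- transitive closure (fixpoint of edge relaxation) and a pairwise check over the
-- evenly-connected chord pairs; no classes and no traversal are built.
-- Objective: alternative (structurally different, similar cost).
-- Shared literal helpers (the two Pythons build these identically): the chord list,
-- the normalized order enumeration (itertools.permutations) and an order's position dict.
def pvChords : List (Int × Int) :=
  (PySem.List.pyRange 0 8 1).flatMap (fun a => (PySem.List.pyRange (a + 1) 8 1).map (fun b => (a, b)))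

def pvNormOrders : List (List Int) :=
  (PySem.List.permutations (PySem.List.pyRange 1 8 1) 7).filterMap (fun tail =>
    let order := 0 :: tail
    if PySem.List.pyGetD order 1 0 < PySem.List.pyGetD order (-1) 0 then some order else none)

def pvPos (order : List Int) : PySem.Dict Int Int :=
  (PySem.List.enumerate order 0).foldl (fun d p => d.insert p.2 p.1) PySem.Dict.empty

-- witnesses_of(rows, i)
def aWitnesses (rows : List (List Int)) (i : Int) : List Int :=
  (PySem.List.enumerate ((PySem.List.pyGet? rows i).getD []) 0).filterMap
    (fun jv => if jv.2 ≠ 0 then some jv.1 else none)    -- rows[i]: IndexError excluded by Pre_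

-- phi_edges
def aPhiEdges (rows : List (List Int)) : List ((Int × Int) × (Int × Int)) :=
  let w : List (PySem.Set Int) :=
    (PySem.List.pyRange 0 8 1).map (fun i => PySem.Set.ofList (aWitnesses rows i))
  (PySem.List.pyRange 0 8 1).foldl (fun edges i =>
    (PySem.List.pyRange (i + 1) 8 1).foldl (fun edges j =>
      let inter := PySem.List.sorted
        (PySem.Set.inter (PySem.List.pyGetD w i PySem.Set.empty) (PySem.List.pyGetD w j PySem.Set.empty))
        (fun x => x) false
      if inter.length = 2 then
        edges ++ [((i, j), (PySem.List.pyGetD inter 0 0, PySem.List.pyGetD inter 1 0))]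
      else edges) edges) []

-- graph = defaultdict(set) with both directions of each phi edge
def aGraph (edges : List ((Int × Int) × (Int × Int))) :
    PySem.Dict (Int × Int) (PySem.Set (Int × Int)) :=
  edges.foldl (fun g e =>
    let g := g.modify e.1 PySem.Set.empty (fun s => PySem.Set.add s e.2)
    g.modify e.2 PySem.Set.empty (fun s => PySem.Set.add s e.1)) PySem.Dict.empty

structure AState where
  color : PySem.Dict (Int × Int) Int
  comp : List (Int × Int)
  q : List (Int × Int)
  bip : Bool
  deriving Repr

-- body of 'for v in graph[u]' inside the BFS while loop
def aVisit (u : Int × Int) (st : AState) (v : Int × Int) : AState :=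
  if st.color.contains v = false then
    { st with color := st.color.insert v (1 - st.color.getD u 0),
              comp := st.comp ++ [v], q := st.q ++ [v] }
  else if st.color.getD v 0 = st.color.getD u 0 then { st with bip := false }
  else st

-- the 'while q' loop (fuel bounds the number of dequeues; aBfs_run shows it never runs out)
def aBfs (graph : PySem.Dict (Int × Int) (PySem.Set (Int × Int))) :
    Nat → AState → AState
  | 0, st => st
  | fuel + 1, st =>
    match st.q with
    | [] => st
    | u :: rest =>
      aBfs graph fuel (((graph.getD u PySem.Set.empty) : List (Int × Int)).foldl (aVisit u) { st with q := rest })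

-- bucket = defaultdict(list); for c in component: bucket[color[c]].append(c); emit sorted classes of size >= 2
def aBuckets (comp : List (Int × Int)) (color : PySem.Dict (Int × Int) Int) :
    List (List (Int × Int)) :=
  let bucket : PySem.Dict Int (List (Int × Int)) :=
    comp.foldl (fun d c => d.modify (color.getD c 0) [] (fun l => l ++ [c])) PySem.Dict.empty
  bucket.values.foldl (fun acc cls =>
    if 2 ≤ cls.length then acc ++ [PySem.List.sorted2 cls (·.1) (·.2)] else acc) []

-- the 'for start in chords' loop of _forced_perp_color
def aOuter (graph : PySem.Dict (Int × Int) (PySem.Set (Int × Int))) (fuel : Nat) :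
    List (Int × Int) → PySem.Dict (Int × Int) Int → List (List (Int × Int)) →
    Bool × List (List (Int × Int))
  | [], _, acc => (true, acc)
  | start :: rest, color, acc =>
    if color.contains start then aOuter graph fuel rest color acc
    else
      let st := aBfs graph fuel ⟨color.insert start 0, [start], [start], true⟩
      if st.bip = false then (false, [])
      else aOuter graph fuel rest st.color (acc ++ aBuckets st.comp st.color)

-- _crosses
def aCrosses (c1 c2 : Int × Int) (pos : PySem.Dict Int Int) : Bool :=
  if PySem.Set.len (PySem.Set.ofList [c1.1, c1.2, c2.1, c2.2]) < 4 then false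
  else
    let pa := pos.getD c1.1 0    -- pos[a]: KeyError excluded by Pre_
    let pb := pos.getD c1.2 0
    let pc := pos.getD c2.1 0
    let pd := pos.getD c2.2 0
    let s := if pa > pb then (pb, pa) else (pa, pb)
    let cin := decide (s.1 < pc ∧ pc < s.2)
    let din := decide (s.1 < pd ∧ pd < s.2)
    cin != din

-- the 'used' loop over one class (breaks at the first shared endpoint)
def aUsedOk : List (Int × Int) → PySem.Set Int → Bool
  | [], _ => true
  | ch :: rest, used =>
    if PySem.Set.contains used ch.1 || PySem.Set.contains used ch.2 then false
    else aUsedOk rest (PySem.Set.add (PySem.Set.add used ch.1) ch.2)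

-- the 'for left, right in combinations(cls, 2)' loop (breaks at the first crossing)
def aCrossOk (pos : PySem.Dict Int Int) : List (List (Int × Int)) → Bool
  | [] => true
  | pr :: rest =>
    if aCrosses (PySem.List.pyGetD pr 0 (0, 0)) (PySem.List.pyGetD pr 1 (0, 0)) pos then false
    else aCrossOk pos rest

-- the 'for cls in same_color_classes' loop with its ok flag
def aClassesOk (pos : PySem.Dict Int Int) : List (List (Int × Int)) → Bool
  | [] => true
  | cls :: rest =>
    if aUsedOk cls PySem.Set.empty = false then false
    else if aCrossOk pos (PySem.List.combinations cls 2) = false then false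
    else aClassesOk pos rest

-- 'for order in _normalized_orders()' with the early 'return False'
def aOrderLoop (classes : List (List (Int × Int))) : List (List Int) → Bool
  | [] => true
  | o :: os => if aClassesOk (pvPos o) classes then false else aOrderLoop classes os

def cyclic_order_kill (rows : List (List Int)) : Bool :=
  let edges := aPhiEdges rows
  let res := aOuter (aGraph edges) (2 * edges.length + 2) pvChords PySem.Dict.empty []
  if res.1 = false then true
  else aOrderLoop res.2 pvNormOrders

-- ===== PORT B =====
-- edges: filtered index scan per row pair
def bCommon (ri rj : List Int) : List Int :=
  (PySem.List.pyRange 0 (min ri.length rj.length) 1).filter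
    (fun k => !(PySem.List.pyGetD ri k 0 = 0) && !(PySem.List.pyGetD rj k 0 = 0))

def bEdges (rows : List (List Int)) : List ((Int × Int) × (Int × Int)) :=
  (PySem.List.pyRange 0 8 1).foldl (fun out i =>
    let ri := (PySem.List.pyGet? rows i).getD []    -- rows[i]: IndexError excluded by Pre_
    (PySem.List.pyRange (i + 1) 8 1).foldl (fun out j =>
      let rj := (PySem.List.pyGet? rows j).getD []
      let common := bCommon ri rj
      if common.length = 2 then
        out ++ [((i, j), (PySem.List.pyGetD common 0 0, PySem.List.pyGetD common 1 0))]
      else out) out) []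

-- sym = edges + [(t, s) for (s, t) in edges]
def bSym (edges : List ((Int × Int) × (Int × Int))) : List ((Int × Int) × (Int × Int)) :=
  edges ++ edges.map (fun e => (e.2, e.1))

-- verts = sorted({v for e in sym for v in e})  (sorted without key: tuple = component order)
def bVerts (sym : List ((Int × Int) × (Int × Int))) : List (Int × Int) :=
  PySem.List.sorted2 (PySem.Set.ofList (sym.flatMap (fun e => [e.1, e.2]))) (·.1) (·.2)

structure CSt where
  ev : PySem.Set ((Int × Int) × (Int × Int))
  od : PySem.Set ((Int × Int) × (Int × Int))
  ch : Bool
  deriving Repr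

-- body of 'for w in verts' of the relaxation round
def cW (e : (Int × Int) × (Int × Int)) (st : CSt) (w : Int × Int) : CSt :=
  let st1 := if PySem.Set.contains st.ev (e.2, w) && !(PySem.Set.contains st.od (e.1, w)) then
      { st with od := PySem.Set.add st.od (e.1, w), ch := true } else st
  if PySem.Set.contains st1.od (e.2, w) && !(PySem.Set.contains st1.ev (e.1, w)) then
      { st1 with ev := PySem.Set.add st1.ev (e.1, w), ch := true } else st1

-- one round: 'changed = False; for (u, v) in sym: for w in verts: …'
def cRound (sym : List ((Int × Int) × (Int × Int))) (verts : List (Int × Int))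
    (ev od : PySem.Set ((Int × Int) × (Int × Int))) : CSt :=
  sym.foldl (fun st e => verts.foldl (cW e) st) ⟨ev, od, false⟩

-- 'while True: … if not changed: break'  (fuel bounds the rounds; cLoop_run shows it never runs out)
def cLoop (sym : List ((Int × Int) × (Int × Int))) (verts : List (Int × Int)) :
    Nat → PySem.Set ((Int × Int) × (Int × Int)) × PySem.Set ((Int × Int) × (Int × Int)) →
    PySem.Set ((Int × Int) × (Int × Int)) × PySem.Set ((Int × Int) × (Int × Int))
  | 0, p => p
  | fuel + 1, p =>
    let st := cRound sym verts p.1 p.2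
    if st.ch then cLoop sym verts fuel (st.ev, st.od) else (st.ev, st.od)

-- tuple comparison u < v
def bLexLt (u v : Int × Int) : Bool := decide (u.1 < v.1 ∨ (u.1 = v.1 ∧ u.2 < v.2))

-- pairs = [(u, v) for u in verts for v in verts if u < v and (u, v) in even]
def bPairs (verts : List (Int × Int)) (ev : PySem.Set ((Int × Int) × (Int × Int))) :
    List ((Int × Int) × (Int × Int)) :=
  verts.flatMap (fun u =>
    (verts.filter (fun v => bLexLt u v && PySem.Set.contains ev (u, v))).map (fun v => (u, v)))

-- body of 'for (a, b), (c, d) in pairs' (pass = no shared endpoint and no crossing)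
def bPairGood (pos : PySem.Dict Int Int) (p : (Int × Int) × (Int × Int)) : Bool :=
  if PySem.Set.len (PySem.Set.ofList [p.1.1, p.1.2, p.2.1, p.2.2]) < 4 then false
  else
    let pa := min (pos.getD p.1.1 0) (pos.getD p.1.2 0)    -- pos[a]: KeyError excluded by Pre_
    let pb := max (pos.getD p.1.1 0) (pos.getD p.1.2 0)
    let pc := min (pos.getD p.2.1 0) (pos.getD p.2.2 0)
    let pd := max (pos.getD p.2.1 0) (pos.getD p.2.2 0)
    !(decide (pa < pc ∧ pc < pb ∧ pb < pd) || decide (pc < pa ∧ pa < pd ∧ pd < pb))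

def cyclic_order_kill_alt (rows : List (List Int)) : Bool :=
  let edges := bEdges rows
  let sym := bSym edges
  let verts := bVerts sym
  let res := cLoop sym verts (2 * verts.length * verts.length + 1)
      (PySem.Set.ofList (verts.map (fun v => (v, v))), PySem.Set.empty)
  if verts.any (fun v => PySem.Set.contains res.2 (v, v)) then true
  else
    let pairs := bPairs verts res.1
    !(pvNormOrders.any (fun o => pairs.all (bPairGood (pvPos o))))

-- ===== PRECONDITION & SPEC =====
-- Pre_ excludes inputs where A raises (fewer than 8 rows: IndexError) and inputs where two of the
-- first 8 rows have exactly two common nonzero columns not both below 8: there the forced "chord"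
-- uses labels outside the 8 cyclic points, which raises KeyError whenever such a chord reaches the
-- crossing test and is an accidental value otherwise.
def pvCommonPre (ri rj : List Int) : List Nat :=
  (List.range (min ri.length rj.length)).filter
    (fun (k : Nat) => decide (ri.getD k 0 ≠ 0) && decide (rj.getD k 0 ≠ 0))

def Pre_cyclic_order_kill (rows : List (List Int)) : Prop :=
  8 ≤ rows.length ∧
  ∀ j : Nat, j < 8 → ∀ i : Nat, i < j →
    (pvCommonPre (rows.getD i []) (rows.getD j [])).length = 2 →
    ∀ x ∈ pvCommonPre (rows.getD i []) (rows.getD j []), x < 8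

instance (rows : List (List Int)) : Decidable (Pre_cyclic_order_kill rows) := by
  unfold Pre_cyclic_order_kill; infer_instance

def pvWitness_cyclic_order_kill : List (List Int) :=
  [[1, 1, 0, 0, 0, 0, 0, 0], [1, 1, 0, 0, 0, 0, 0, 0], [0, 0, 1, 1, 0, 0, 0, 0],
   [0, 0, 1, 1, 0, 0, 0, 0], [0, 0, 0, 0, 0, 0, 0, 0], [0, 0, 0, 0, 0, 0, 0, 0],
   [0, 0, 0, 0, 0, 0, 0, 0], [0, 0, 0, 0, 0, 0, 0, 0]]

def Spec_cyclic_order_kill (rows : List (List Int)) (out : Bool) : Prop := out = cyclic_order_kill_alt rows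
instance (rows : List (List Int)) (out : Bool) : Decidable (Spec_cyclic_order_kill rows out) := by unfold Spec_cyclic_order_kill; infer_instance

-- ===== CLAIM (what is proved, stated in full; the proofs are below) =====
def Claim_equal_cyclic_order_kill : Prop := ∀ (rows : List (List Int)), Dom_cyclic_order_kill rows → Pre_cyclic_order_kill rows → Spec_cyclic_order_kill rows (cyclic_order_kill rows)

-- ===== LEMMAS AND PROOFS =====

-- ---------- Section 1: the two edge constructions agree ----------
def pvWitList (r : List Int) : List Int :=
  (PySem.List.pyRange 0 r.length 1).filter (fun k => !(PySem.List.pyGetD r k 0 == 0))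

lemma filterMap_if_eq_filter {α : Type} (p : α → Bool) (l : List α) :
    l.filterMap (fun x => if p x then some x else none) = l.filter p := by
  induction l with
  | nil => rfl
  | cons x xs ih => by_cases h : p x <;> simp [List.filter_cons, h, ih]

lemma aWitnesses_eq (rows : List (List Int)) (i : Int) :
    aWitnesses rows i = pvWitList ((PySem.List.pyGet? rows i).getD []) := by
  unfold aWitnesses pvWitList
  rw [PySem.List.enumerate_eq_map_pyRange _ 0, List.filterMap_map]
  have h : ((fun jv : Int × Int => if jv.2 ≠ 0 then some jv.1 else none) ∘
      (fun j => (j, PySem.List.pyGetD ((PySem.List.pyGet? rows i).getD []) j 0)))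
      = (fun j : Int => if (!(PySem.List.pyGetD ((PySem.List.pyGet? rows i).getD []) j 0 == 0)) = true then some j else none) := by
    funext j
    by_cases h1 : PySem.List.pyGetD ((PySem.List.pyGet? rows i).getD []) j 0 = 0 <;>
      simp [Function.comp, h1]
  rw [h, filterMap_if_eq_filter]; simp [PySem.List.len]

lemma pairwise_lt_pvWitList (r : List Int) : (pvWitList r).Pairwise (· < ·) :=
  (PySem.List.pairwise_lt_pyRange_one 0 r.length).filter _

lemma inter_wit_eq_common (ri rj : List Int) :
    PySem.Set.inter (PySem.Set.ofList (pvWitList ri)) (PySem.Set.ofList (pvWitList rj))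
      = bCommon ri rj := by
  rw [PySem.Set.ofList_eq_self_of_nodup _ (pairwise_lt_pvWitList ri).nodup,
      PySem.Set.ofList_eq_self_of_nodup _ (pairwise_lt_pvWitList rj).nodup]
  show (pvWitList ri).filter (fun x => PySem.Set.contains (pvWitList rj) x) = bCommon ri rj
  unfold pvWitList bCommon
  rw [List.filter_filter]
  have hmin : (min (ri.length : Int) (rj.length : Int)) = ((min ri.length rj.length : Nat) : Int) := by
    push_cast; rfl
  rw [hmin]
  rw [PySem.List.pyRange_one_append 0 (min ri.length rj.length : Nat) ri.length
        (by positivity) (by exact_mod_cast Nat.min_le_left _ _)]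
  rw [List.filter_append]
  have h2 : ((PySem.List.pyRange (min ri.length rj.length : Nat) ri.length 1).filter
      (fun k => PySem.Set.contains ((PySem.List.pyRange 0 rj.length 1).filter (fun k => !(PySem.List.pyGetD rj k 0 == 0))) k
        && !(PySem.List.pyGetD ri k 0 == 0))) = [] := by
    rw [List.filter_eq_nil_iff]
    intro k hk
    rw [PySem.List.mem_pyRange_one] at hk
    have hk2 : ¬ (k ∈ (PySem.List.pyRange 0 rj.length 1).filter (fun k => !(PySem.List.pyGetD rj k 0 == 0))) := by
      intro hmem
      rw [List.mem_filter, PySem.List.mem_pyRange_one] at hmem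
      have : (rj.length : Int) ≤ k := by
        rcases hk with ⟨h1, h2⟩
        rcases Nat.le_or_ge ri.length rj.length with h | h
        · exfalso; have : (min ri.length rj.length : Nat) = ri.length := by omega
          rw [this] at h1; omega
        · have : (min ri.length rj.length : Nat) = rj.length := by omega
          rw [this] at h1; exact_mod_cast h1
      omega
    simp only [PySem.Set.contains, Bool.and_eq_true, List.contains_iff_mem] at *
    intro h; exact absurd h.1 (by simpa using hk2)
  rw [h2, List.append_nil]
  apply List.filter_congr
  intro k hk
  rw [PySem.List.mem_pyRange_one] at hk
  have hk1 : k < (rj.length : Int) := by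
    have := hk.2; push_cast at this ⊢; omega
  simp only [PySem.Set.contains, List.contains_iff_mem, List.mem_filter,
    PySem.List.mem_pyRange_one]
  have : (0 ≤ k ∧ k < (rj.length : Int)) := ⟨hk.1, hk1⟩
  by_cases hri : PySem.List.pyGetD ri k 0 = 0 <;>
    by_cases hrj : PySem.List.pyGetD rj k 0 = 0 <;> simp [hri, hrj, this]

lemma pairwise_lt_bCommon (ri rj : List Int) : (bCommon ri rj).Pairwise (· < ·) :=
  (PySem.List.pairwise_lt_pyRange_one _ _).filter _

lemma sorted_bCommon (ri rj : List Int) :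
    PySem.List.sorted (bCommon ri rj) (fun x => x) false = bCommon ri rj :=
  PySem.List.sorted_eq_of_perm_of_pairwise_lt _ _ _ (List.Perm.refl _) (pairwise_lt_bCommon ri rj)

lemma edges_eq (rows : List (List Int)) : aPhiEdges rows = bEdges rows := by
  unfold aPhiEdges bEdges
  apply PySem.List.foldl_congr_mem
  intro acc i hi
  rw [PySem.List.mem_pyRange_one] at hi
  apply PySem.List.foldl_congr_mem
  intro acc2 j hj
  have hw : ∀ t : Int, 0 ≤ t → t < 8 →
      PySem.List.pyGetD ((PySem.List.pyRange 0 8 1).map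
        (fun i => PySem.Set.ofList (aWitnesses rows i))) t PySem.Set.empty
      = PySem.Set.ofList (pvWitList ((PySem.List.pyGet? rows t).getD [])) := by
    intro t h0 h8
    rw [PySem.List.pyGetD_map_pyRange_of_nonneg _ _ _ _ h0 h8, aWitnesses_eq]
  rw [PySem.List.mem_pyRange_one] at hj
  rw [hw i hi.1 hi.2, hw j (by omega) hj.2, inter_wit_eq_common, sorted_bCommon]

-- ---------- Section 2: adjacency, walks and parity ----------
def AdjE (E : List ((Int × Int) × (Int × Int))) (u v : Int × Int) : Prop :=
  (u, v) ∈ E ∨ (v, u) ∈ E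

lemma AdjE_symm {E : List ((Int × Int) × (Int × Int))} {u v : Int × Int}
    (h : AdjE E u v) : AdjE E v u := h.elim .inr .inl

inductive ReachE (E : List ((Int × Int) × (Int × Int))) (s : Int × Int) : (Int × Int) → Prop
  | refl : ReachE E s s
  | step {u v : Int × Int} : ReachE E s u → AdjE E u v → ReachE E s v

-- walks with a parity (false = even length)
inductive Walk (E : List ((Int × Int) × (Int × Int))) : (Int × Int) → (Int × Int) → Bool → Prop
  | nil (u : Int × Int) : Walk E u u false
  | cons {u v w : Int × Int} {p : Bool} : AdjE E u v → Walk E v w p → Walk E u w (!p)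

def OddSelf (E : List ((Int × Int) × (Int × Int))) : Prop :=
  ∃ v, Walk E v v true

def pvEndpoints (E : List ((Int × Int) × (Int × Int))) : List (Int × Int) :=
  E.flatMap (fun e => [e.1, e.2])

lemma mem_endpoints_of_adj {E : List ((Int × Int) × (Int × Int))} {u v : Int × Int}
    (h : AdjE E u v) : v ∈ pvEndpoints E := by
  rcases h with h | h
  · exact List.mem_flatMap.mpr ⟨(u, v), h, by simp⟩
  · exact List.mem_flatMap.mpr ⟨(v, u), h, by simp⟩

lemma length_endpoints (E : List ((Int × Int) × (Int × Int))) :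
    (pvEndpoints E).length = 2 * E.length := by
  induction E with
  | nil => rfl
  | cons e rest ih => simp [pvEndpoints] at ih ⊢; omega

lemma walk_single {E : List ((Int × Int) × (Int × Int))} {u v : Int × Int}
    (h : AdjE E u v) : Walk E u v true := Walk.cons h (Walk.nil v)

lemma walk_trans {E : List ((Int × Int) × (Int × Int))} {u v w : Int × Int} {p q : Bool} :
    Walk E u v p → Walk E v w q → Walk E u w (xor p q) := by
  intro h1
  induction h1 with
  | nil => intro h2; simpa using h2
  | cons hadj _ ih =>
    intro h2
    have := Walk.cons hadj (ih h2)
    simpa [Bool.xor_comm, Bool.xor_assoc] using this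

lemma walk_symm {E : List ((Int × Int) × (Int × Int))} {u v : Int × Int} {p : Bool} :
    Walk E u v p → Walk E v u p := by
  intro h
  induction h with
  | nil => exact Walk.nil _
  | cons hadj _ ih =>
    have := walk_trans ih (walk_single (AdjE_symm hadj))
    simpa [Bool.xor_comm] using this

lemma walk_endpoints {E : List ((Int × Int) × (Int × Int))} {u v : Int × Int} {p : Bool}
    (h : Walk E u v p) : (p = false ∧ u = v) ∨ (u ∈ pvEndpoints E ∧ v ∈ pvEndpoints E) := by
  induction h with
  | nil => exact .inl ⟨rfl, rfl⟩
  | cons hadj hw ih =>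
    right
    refine ⟨mem_endpoints_of_adj (AdjE_symm hadj), ?_⟩
    rcases ih with ⟨_, rfl⟩ | ⟨_, h2⟩
    · exact mem_endpoints_of_adj hadj
    · exact h2

lemma reach_walk {E : List ((Int × Int) × (Int × Int))} {s x : Int × Int}
    (h : ReachE E s x) : ∃ p, Walk E s x p := by
  induction h with
  | refl => exact ⟨false, Walk.nil _⟩
  | step _ hadj ih =>
    obtain ⟨p, hw⟩ := ih
    exact ⟨xor p true, walk_trans hw (walk_single hadj)⟩

-- with no odd closed walk, walk parity from s is a proper 2-coloring of s's component
lemma proper_of_no_odd (E : List ((Int × Int) × (Int × Int))) (h : ¬ OddSelf E)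
    (s : Int × Int) :
    ∃ cr : (Int × Int) → Int,
      (∀ a b, ReachE E s a → ReachE E s b → AdjE E a b → cr a ≠ cr b) ∧
      (∀ x, ReachE E s x → cr x = 0 ∨ cr x = 1) ∧ cr s = 0 := by
  classical
  refine ⟨fun x => if Walk E s x false then 0 else 1, ?_, ?_, ?_⟩
  · intro a b hra hrb hadj heq
    by_cases ha : Walk E s a false
    · by_cases hb : Walk E s b false
      · -- both even: odd closed walk at a
        have h1 : Walk E a b false := by
          have := walk_trans (walk_symm ha) hb
          simpa using this
        have h2 : Walk E a a true := by
          have := walk_trans h1 (walk_single (AdjE_symm hadj))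
          simpa using this
        exact h ⟨a, h2⟩
      · simp [ha, hb] at heq
    · by_cases hb : Walk E s b false
      · simp [ha, hb] at heq
      · -- both odd
        obtain ⟨p, hpa⟩ := reach_walk hra
        obtain ⟨q, hpb⟩ := reach_walk hrb
        have hp : p = true := by
          cases p with
          | false => exact absurd hpa ha
          | true => rfl
        have hq : q = true := by
          cases q with
          | false => exact absurd hpb hb
          | true => rfl
        subst hp; subst hq
        have h1 : Walk E a b false := by
          have := walk_trans (walk_symm hpa) hpb
          simpa using this
        have h2 : Walk E a a true := by
          have := walk_trans h1 (walk_single (AdjE_symm hadj))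
          simpa using this
        exact h ⟨a, h2⟩
  · intro x _
    by_cases hx : Walk E s x false <;> simp [hx]
  · simp [Walk.nil]

-- ---------- Section 3: A's graph and BFS invariants ----------
lemma adjE_cons (e : (Int × Int) × (Int × Int)) (rest : List ((Int × Int) × (Int × Int)))
    (u v : Int × Int) :
    AdjE (e :: rest) u v ↔ ((u = e.1 ∧ v = e.2) ∨ (v = e.1 ∧ u = e.2)) ∨ AdjE rest u v := by
  simp [AdjE, List.mem_cons, Prod.ext_iff]; tauto

lemma mem_aGraph_aux (E : List ((Int × Int) × (Int × Int)))
    (d : PySem.Dict (Int × Int) (PySem.Set (Int × Int))) (u v : Int × Int) :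
    v ∈ (E.foldl (fun g e =>
      let g := g.modify e.1 PySem.Set.empty (fun s => PySem.Set.add s e.2)
      g.modify e.2 PySem.Set.empty (fun s => PySem.Set.add s e.1)) d).getD u PySem.Set.empty
    ↔ v ∈ d.getD u PySem.Set.empty ∨ AdjE E u v := by
  induction E generalizing d with
  | nil => simp [AdjE]
  | cons e rest ih =>
    rw [List.foldl_cons]
    rw [ih]
    rw [adjE_cons]
    simp only [PySem.Dict.getD_modify]
    by_cases h1 : u = e.2 <;> by_cases h2 : u = e.1 <;>
      simp [h1, h2, PySem.Set.mem_add, Prod.ext_iff] <;> aesop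

lemma mem_aGraph (E : List ((Int × Int) × (Int × Int))) (u v : Int × Int) :
    v ∈ (aGraph E).getD u PySem.Set.empty ↔ AdjE E u v := by
  have h := mem_aGraph_aux E PySem.Dict.empty u v
  simp only [PySem.Dict.getD_empty] at h
  unfold aGraph
  rw [h]
  simp [PySem.Set.empty]

lemma all_congr_mem {α : Type} (l : List α) (p q : α → Bool)
    (h : ∀ x ∈ l, p x = q x) : l.all p = l.all q := by
  induction l with
  | nil => rfl
  | cons x xs ih => simp only [List.all_cons, h x (by simp), ih (fun y hy => h y (by simp [hy]))]

lemma aVisit_fold (u : Int × Int) (ns : List (Int × Int)) (st : AState)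
    (hu : st.color.contains u = true) (hnd : st.color.keys.Nodup) :
    ∃ new : List (Int × Int),
      new.Nodup ∧
      (∀ x ∈ new, x ∈ ns ∧ st.color.contains x = false) ∧
      (ns.foldl (aVisit u) st).comp = st.comp ++ new ∧
      (ns.foldl (aVisit u) st).q = st.q ++ new ∧
      (ns.foldl (aVisit u) st).color.keys.Nodup ∧
      (∀ x, (ns.foldl (aVisit u) st).color.contains x = (st.color.contains x || decide (x ∈ new))) ∧
      (∀ x, st.color.contains x = true → (ns.foldl (aVisit u) st).color.get? x = st.color.get? x) ∧
      (∀ x ∈ new, (ns.foldl (aVisit u) st).color.getD x 0 = 1 - st.color.getD u 0) ∧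
      (∀ v ∈ ns, (ns.foldl (aVisit u) st).color.contains v = true) ∧
      ((ns.foldl (aVisit u) st).bip = (st.bip &&
        ns.all (fun v => !(st.color.contains v) || !(decide (st.color.getD v 0 = st.color.getD u 0))))) := by
  induction ns generalizing st with
  | nil =>
    exact ⟨[], by simp, by simp, by simp, by simp, hnd, by simp, by simp, by simp, by simp,
      by simp⟩
  | cons v ns ih =>
    rw [List.foldl_cons]
    by_cases hv : st.color.contains v = false
    · -- fresh vertex
      have hne1 : (1 : Int) - st.color.getD u 0 ≠ st.color.getD u 0 := by omega
      set st2 : AState := ({ st with color := st.color.insert v (1 - st.color.getD u 0), comp := st.comp ++ [v], q := st.q ++ [v] } : AState) with hst2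
      have hvisit : aVisit u st v = st2 := by rw [aVisit, if_pos hv]
      have hvu : v ≠ u := fun h => by rw [h, hu] at hv; cases hv
      have hu2 : st2.color.contains u = true := by
        simp [hst2, PySem.Dict.contains_insert, hu]
      have hnd2 : st2.color.keys.Nodup := by
        simpa [hst2] using PySem.Dict.nodup_keys_insert _ _ _ hnd
      obtain ⟨new2, hnodup2, hfresh2, hcomp2, hq2, hnd2', hcont2, hstable2, hnewcol2, hns2, hbip2⟩ :=
        ih st2 hu2 hnd2
      have hgetu2 : st2.color.getD u 0 = st.color.getD u 0 := by
        simp [hst2, PySem.Dict.getD_insert, hvu.symm]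
      have hvnotnew2 : v ∉ new2 := by
        intro hmem
        have := (hfresh2 v hmem).2
        simp [hst2, PySem.Dict.contains_insert] at this
      refine ⟨v :: new2, ?_, ?_, ?_, ?_, ?_, ?_, ?_, ?_, ?_, ?_⟩
      · exact List.nodup_cons.mpr ⟨hvnotnew2, hnodup2⟩
      · intro x hx
        rcases List.mem_cons.mp hx with rfl | hx
        · exact ⟨by simp, hv⟩
        · obtain ⟨h1, h2⟩ := hfresh2 x hx
          refine ⟨by simp [h1], ?_⟩
          simp [hst2, PySem.Dict.contains_insert] at h2
          exact h2.2
      · rw [hvisit, hcomp2]; simp [hst2]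
      · rw [hvisit, hq2]; simp [hst2]
      · rw [hvisit]; exact hnd2'
      · intro x
        rw [hvisit, hcont2 x]
        by_cases hxv : x = v
        · subst hxv; simp [hst2, PySem.Dict.contains_insert, hv]
        · simp [hst2, PySem.Dict.contains_insert, hxv, Bool.or_assoc]
      · intro x hx
        rw [hvisit, hstable2 x (by simp [hst2, PySem.Dict.contains_insert, hx])]
        have hxv : x ≠ v := fun h => by rw [h, hv] at hx; cases hx
        simp [hst2, PySem.Dict.get?_insert, hxv]
      · intro x hx
        rcases List.mem_cons.mp hx with rfl | hx
        · rw [hvisit]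
          have : st2.color.getD x 0 = 1 - st.color.getD u 0 := by
            simp [hst2, PySem.Dict.getD_insert]
          rw [PySem.Dict.getD_eq_get?_getD, hstable2 x (by simp [hst2, PySem.Dict.contains_insert]),
            ← PySem.Dict.getD_eq_get?_getD, this]
        · rw [hvisit, hnewcol2 x hx, hgetu2]
      · intro w hw
        rcases List.mem_cons.mp hw with rfl | hw
        · rw [hvisit, hcont2]
          simp [hst2, PySem.Dict.contains_insert]
        · rw [hvisit]; exact hns2 w hw
      · rw [hvisit, hbip2]
        have hb2 : st2.bip = st.bip := by simp [hst2]
        rw [hb2]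
        have hall : ns.all (fun w => !(st2.color.contains w) || !(decide (st2.color.getD w 0 = st2.color.getD u 0)))
            = ns.all (fun w => !(st.color.contains w) || !(decide (st.color.getD w 0 = st.color.getD u 0))) := by
          apply all_congr_mem
          intro w _
          by_cases hwv : w = v
          · subst hwv
            simp [hst2, PySem.Dict.contains_insert, PySem.Dict.getD_insert, hv, hvu.symm, hne1]
          · have huv : ¬(u = v) := fun h => hvu h.symm
            have hwb : (w == v) = false := beq_eq_false_iff_ne.mpr hwv
            simp [hst2, PySem.Dict.contains_insert, PySem.Dict.getD_insert, hwv, huv, hwb]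
        rw [hall, List.all_cons]
        have hheadtrue : (!(st.color.contains v) || !(decide (st.color.getD v 0 = st.color.getD u 0))) = true := by
          simp [hv]
        rw [hheadtrue]
        simp
    · -- already coloured
      rw [Bool.not_eq_false] at hv
      by_cases heq : st.color.getD v 0 = st.color.getD u 0
      · have hvisit : aVisit u st v = { st with bip := false } := by
          rw [aVisit, if_neg (by simp [hv]), if_pos heq]
        obtain ⟨new2, hnodup2, hfresh2, hcomp2, hq2, hnd2', hcont2, hstable2, hnewcol2, hns2, hbip2⟩ :=
          ih { st with bip := false } (by simpa using hu) (by simpa using hnd)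
        rw [hvisit]
        refine ⟨new2, hnodup2, ?_, hcomp2, hq2, hnd2', hcont2, hstable2, hnewcol2, ?_, ?_⟩
        · intro x hx; obtain ⟨h1, h2⟩ := hfresh2 x hx; exact ⟨by simp [h1], h2⟩
        · intro w hw; rcases List.mem_cons.mp hw with rfl | hw
          · rw [hcont2 w]; simp [hv]
          · exact hns2 w hw
        · rw [hbip2]; simp [hv, heq]
      · have hvisit : aVisit u st v = st := by
          rw [aVisit, if_neg (by simp [hv]), if_neg heq]
        obtain ⟨new2, hnodup2, hfresh2, hcomp2, hq2, hnd2', hcont2, hstable2, hnewcol2, hns2, hbip2⟩ :=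
          ih st hu hnd
        rw [hvisit]
        refine ⟨new2, hnodup2, ?_, hcomp2, hq2, hnd2', hcont2, hstable2, hnewcol2, ?_, ?_⟩
        · intro x hx; obtain ⟨h1, h2⟩ := hfresh2 x hx; exact ⟨by simp [h1], h2⟩
        · intro w hw; rcases List.mem_cons.mp hw with rfl | hw
          · rw [hcont2 w]; simp [hv]
          · exact hns2 w hw
        · rw [hbip2]; simp [hv, heq]

structure AInv (E : List ((Int × Int) × (Int × Int))) (s : Int × Int)
    (col0 : PySem.Dict (Int × Int) Int) (st : AState) : Prop where
  keys_nodup : st.color.keys.Nodup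
  keys_eq : ∀ x, st.color.contains x = (col0.contains x || decide (x ∈ st.comp))
  comp_nodup : st.comp.Nodup
  comp_fresh : ∀ x ∈ st.comp, col0.contains x = false
  comp_head : ∃ t, st.comp = s :: t
  comp_reach : ∀ x ∈ st.comp, ReachE E s x
  col01 : ∀ x ∈ st.comp, st.color.getD x 0 = 0 ∨ st.color.getD x 0 = 1
  col_old : ∀ x, col0.contains x = true → st.color.get? x = col0.get? x
  col_s : st.color.getD s 0 = 0
  q_sub : ∀ x ∈ st.q, x ∈ st.comp
  closed : st.bip = true → ∀ u, st.color.contains u = true → u ∉ st.q →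
    ∀ v, AdjE E u v → st.color.contains v = true ∧ st.color.getD u 0 ≠ st.color.getD v 0
  bad : st.bip = false → ∃ u v, u ∈ st.comp ∧ AdjE E u v ∧ st.color.contains v = true ∧
    st.color.getD u 0 = st.color.getD v 0
  forced : ∀ cr : (Int × Int) → Int,
    (∀ a b, ReachE E s a → ReachE E s b → AdjE E a b → cr a ≠ cr b) →
    (∀ x, ReachE E s x → cr x = 0 ∨ cr x = 1) → cr s = 0 →
    ∀ x ∈ st.comp, st.color.getD x 0 = cr x

lemma filter_split_length {α : Type} [DecidableEq α] (pOld pNew : α → Bool) (new : List α)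
    (hsplit : ∀ x, pOld x = (pNew x || decide (x ∈ new)))
    (hdisj : ∀ x ∈ new, pNew x = false) :
    ∀ U : List α, (U.filter pOld).length
      = (U.filter pNew).length + (U.filter (fun x => decide (x ∈ new))).length := by
  intro U
  induction U with
  | nil => simp
  | cons a U ih =>
    simp only [List.filter_cons]
    by_cases hn : pNew a = true <;> by_cases hm : a ∈ new
    · exact absurd (hdisj a hm) (by simp [hn])
    · have hpo : pOld a = true := by rw [hsplit]; simp [hn]
      simp [hpo, hn, hm, ih] <;> omega
    · have hpo : pOld a = true := by rw [hsplit]; simp [hm]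
      simp [hpo, hn, hm, ih] <;> omega
    · have hpo : pOld a = false := by rw [hsplit]; simp [hn, hm]
      simp [hpo, hn, hm, ih] <;> omega

lemma filter_count_drop {α : Type} [DecidableEq α] (U new : List α) (pOld pNew : α → Bool)
    (hnodup : new.Nodup)
    (hsub : ∀ x ∈ new, x ∈ U)
    (hsplit : ∀ x, pOld x = (pNew x || decide (x ∈ new)))
    (hdisj : ∀ x ∈ new, pNew x = false) :
    (U.filter pNew).length + new.length ≤ (U.filter pOld).length := by
  have h2 := filter_split_length pOld pNew new hsplit hdisj U
  have h3 : new.length ≤ (U.filter (fun x => decide (x ∈ new))).length := by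
    have hsp : new.Subperm (U.filter (fun x => decide (x ∈ new))) :=
      List.subperm_of_subset hnodup (fun x hx => List.mem_filter.mpr ⟨hsub x hx, by simp [hx]⟩)
    exact hsp.length_le
  omega

lemma aBfs_run (E : List ((Int × Int) × (Int × Int)))
    (graph : PySem.Dict (Int × Int) (PySem.Set (Int × Int)))
    (hgraph : ∀ u v, (v ∈ graph.getD u PySem.Set.empty) ↔ AdjE E u v)
    (s : Int × Int) (col0 : PySem.Dict (Int × Int) Int) :
    ∀ (fuel : Nat) (st : AState), AInv E s col0 st →
    st.q.length + ((pvEndpoints E).filter (fun x => !(st.color.contains x))).length ≤ fuel →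
    AInv E s col0 (aBfs graph fuel st) ∧ (aBfs graph fuel st).q = [] := by
  intro fuel
  induction fuel with
  | zero =>
    intro st hinv hf
    have hq : st.q = [] := List.eq_nil_of_length_eq_zero (by omega)
    rw [aBfs]
    exact ⟨hinv, hq⟩
  | succ n ih =>
    rintro ⟨color, comp, q, bip⟩ hinv hf
    cases q with
    | nil =>
      rw [aBfs]
      exact ⟨hinv, rfl⟩
    | cons u rest =>
      rw [show aBfs graph (n + 1) ⟨color, comp, u :: rest, bip⟩
          = aBfs graph n (((graph.getD u PySem.Set.empty) : List (Int × Int)).foldl (aVisit u)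
              ⟨color, comp, rest, bip⟩) from rfl]
      set ns : List (Int × Int) := ((graph.getD u PySem.Set.empty) : List (Int × Int)) with hns0
      set st1 : AState := ⟨color, comp, rest, bip⟩ with hst1
      have ikeys_nodup : color.keys.Nodup := hinv.keys_nodup
      have ikeys_eq : ∀ x, color.contains x = (col0.contains x || decide (x ∈ comp)) := hinv.keys_eq
      have icomp_nodup : comp.Nodup := hinv.comp_nodup
      have icomp_fresh : ∀ x ∈ comp, col0.contains x = false := hinv.comp_fresh
      have icomp_head : ∃ t, comp = s :: t := hinv.comp_head
      have icomp_reach : ∀ x ∈ comp, ReachE E s x := hinv.comp_reach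
      have icol01 : ∀ x ∈ comp, color.getD x 0 = 0 ∨ color.getD x 0 = 1 := hinv.col01
      have icol_old : ∀ x, col0.contains x = true → color.get? x = col0.get? x := hinv.col_old
      have icol_s : color.getD s 0 = 0 := hinv.col_s
      have iq_sub : ∀ x ∈ (u :: rest), x ∈ comp := hinv.q_sub
      have iclosed : bip = true → ∀ a, color.contains a = true → a ∉ (u :: rest) →
          ∀ v, AdjE E a v → color.contains v = true ∧ color.getD a 0 ≠ color.getD v 0 := hinv.closed
      have ibad : bip = false → ∃ a v, a ∈ comp ∧ AdjE E a v ∧ color.contains v = true ∧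
          color.getD a 0 = color.getD v 0 := hinv.bad
      have iforced : ∀ cr : (Int × Int) → Int,
          (∀ a b, ReachE E s a → ReachE E s b → AdjE E a b → cr a ≠ cr b) →
          (∀ x, ReachE E s x → cr x = 0 ∨ cr x = 1) → cr s = 0 →
          ∀ x ∈ comp, color.getD x 0 = cr x := hinv.forced
      have hu_comp : u ∈ comp := iq_sub u (by simp)
      have hu_col : st1.color.contains u = true := by
        show color.contains u = true
        rw [ikeys_eq]; simp [hu_comp]
      obtain ⟨new, hnodup, hfresh, hcomp, hq, hnd', hcont, hstable, hnewcol, hnsc, hbip⟩ :=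
        aVisit_fold u ns st1 hu_col ikeys_nodup
      set st' : AState := ns.foldl (aVisit u) st1 with hst'
      have hadj_ns : ∀ v, v ∈ ns ↔ AdjE E u v := fun v => hgraph u v
      have hgetD_stable : ∀ x, color.contains x = true →
          st'.color.getD x 0 = color.getD x 0 := by
        intro x hx
        rw [PySem.Dict.getD_eq_get?_getD, hstable x hx, ← PySem.Dict.getD_eq_get?_getD]
      have hcomp_sub : ∀ x ∈ comp, color.contains x = true := by
        intro x hx
        rw [ikeys_eq]; simp [hx]
      have hfresh' : ∀ x ∈ new, x ∈ ns ∧ color.contains x = false := hfresh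
      have hfresh_not_comp : ∀ x ∈ new, x ∉ comp := by
        intro x hx hxc
        have h1 := (hfresh' x hx).2
        rw [hcomp_sub x hxc] at h1; cases h1
      have hcont' : ∀ x, st'.color.contains x = (color.contains x || decide (x ∈ new)) := hcont
      have hcomp' : st'.comp = comp ++ new := hcomp
      have hq' : st'.q = rest ++ new := hq
      have hucolstable : st'.color.getD u 0 = color.getD u 0 := hgetD_stable u hu_col
      have hnewcol' : ∀ x ∈ new, st'.color.getD x 0 = 1 - color.getD u 0 := hnewcol
      have hbip' : st'.bip = (bip && ns.all (fun v => !(color.contains v) ||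
          !(decide (color.getD v 0 = color.getD u 0)))) := hbip
      have hstable' : ∀ x, color.contains x = true → st'.color.get? x = color.get? x := hstable
      have hs_comp : s ∈ comp := by
        obtain ⟨t, ht⟩ := icomp_head
        rw [ht]; simp
      have hinv' : AInv E s col0 st' := by
        refine ⟨hnd', ?_, ?_, ?_, ?_, ?_, ?_, ?_, ?_, ?_, ?_, ?_, ?_⟩
        · -- keys_eq
          intro x
          rw [hcont' x, hcomp', ikeys_eq x]
          by_cases h1 : x ∈ comp <;> by_cases h2 : x ∈ new <;> simp [h1, h2]
        · -- comp_nodup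
          rw [hcomp']
          exact List.Nodup.append icomp_nodup hnodup
            (fun x hx hx2 => hfresh_not_comp x hx2 hx)
        · -- comp_fresh
          rw [hcomp']
          intro x hx
          rcases List.mem_append.mp hx with h | h
          · exact icomp_fresh x h
          · have h1 := (hfresh' x h).2
            rw [ikeys_eq x] at h1
            exact (Bool.or_eq_false_iff.mp h1).1
        · -- comp_head
          obtain ⟨t, ht⟩ := icomp_head
          exact ⟨t ++ new, by rw [hcomp', ht]; simp⟩
        · -- comp_reach
          rw [hcomp']
          intro x hx
          rcases List.mem_append.mp hx with h | h
          · exact icomp_reach x h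
          · exact .step (icomp_reach u hu_comp) ((hadj_ns x).mp (hfresh' x h).1)
        · -- col01
          rw [hcomp']
          intro x hx
          rcases List.mem_append.mp hx with h | h
          · rw [hgetD_stable x (hcomp_sub x h)]
            exact icol01 x h
          · rw [hnewcol' x h]
            rcases icol01 u hu_comp with h1 | h1 <;> rw [h1] <;> simp
        · -- col_old
          intro x hx
          have hcx : color.contains x = true := by rw [ikeys_eq x, hx]; rfl
          rw [hstable' x hcx]
          exact icol_old x hx
        · -- col_s
          rw [hgetD_stable s (hcomp_sub s hs_comp)]
          exact icol_s
        · -- q_sub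
          rw [hq', hcomp']
          intro x hx
          rcases List.mem_append.mp hx with h | h
          · exact List.mem_append.mpr (.inl (iq_sub x (by simp [h])))
          · exact List.mem_append.mpr (.inr h)
        · -- closed
          intro hb x hx hxq v hadj
          rw [hbip'] at hb
          have hbips : bip = true ∧ (ns.all (fun v => !(color.contains v) ||
              !(decide (color.getD v 0 = color.getD u 0)))) = true := by
            constructor <;> [skip; skip] <;> first
              | exact (Bool.and_eq_true_iff.mp hb).1
              | exact (Bool.and_eq_true_iff.mp hb).2
          have hscan := List.all_eq_true.mp hbips.2
          by_cases hxnew : x ∈ new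
          · exact absurd (by rw [hq']; exact List.mem_append.mpr (.inr hxnew)) hxq
          · have hxold : color.contains x = true := by
              have h1 := hcont' x
              rw [hx] at h1
              simpa [hxnew] using h1.symm
            by_cases hxu : x = u
            · subst hxu
              have hvns : v ∈ ns := (hadj_ns v).mpr hadj
              refine ⟨hnsc v hvns, ?_⟩
              by_cases hvnew : v ∈ new
              · rw [hnewcol' v hvnew, hgetD_stable x hxold]
                omega
              · have hvold : color.contains v = true := by
                  have h1 := hnsc v hvns
                  rw [hcont' v] at h1
                  simpa [hvnew] using h1
                have hsc := hscan v hvns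
                rw [hgetD_stable v hvold, hgetD_stable x hxold]
                simp only [hvold, Bool.not_true, Bool.false_or, Bool.not_eq_eq_eq_not,
                  decide_eq_false_iff_not] at hsc
                exact fun hh => hsc hh.symm
            · have hxq2 : x ∉ (u :: rest) := by
                intro hmem
                rcases List.mem_cons.mp hmem with h | h
                · exact hxu h
                · exact hxq (by rw [hq']; exact List.mem_append.mpr (.inl h))
              obtain ⟨h1, h2⟩ := iclosed hbips.1 x hxold hxq2 v hadj
              refine ⟨by rw [hcont' v, h1]; rfl, ?_⟩
              rw [hgetD_stable v h1, hgetD_stable x hxold]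
              exact h2
        · -- bad
          intro hb
          rw [hbip'] at hb
          rcases Bool.and_eq_false_iff.mp hb with h | h
          · obtain ⟨a, v, h1, h2, h3, h4⟩ := ibad h
            refine ⟨a, v, by rw [hcomp']; exact List.mem_append.mpr (.inl h1), h2,
              by rw [hcont' v, h3]; rfl, ?_⟩
            rw [hgetD_stable v h3, hgetD_stable a (hcomp_sub a h1)]
            exact h4
          · obtain ⟨v, hvns, hvp⟩ := List.all_eq_false.mp h
            have hvp2 : color.contains v = true ∧ color.getD v 0 = color.getD u 0 := by
              by_cases h1 : color.contains v = true <;>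
                by_cases h2 : color.getD v 0 = color.getD u 0
              · exact ⟨h1, h2⟩
              all_goals (exfalso; apply hvp; simp [h1, h2])
            have hvold := hvp2.1
            have hveq := hvp2.2
            refine ⟨u, v, by rw [hcomp']; exact List.mem_append.mpr (.inl hu_comp),
              (hadj_ns v).mp hvns, by rw [hcont' v, hvold]; rfl, ?_⟩
            rw [hgetD_stable v hvold, hgetD_stable u hu_col]
            exact hveq.symm
        · -- forced
          intro cr hproper hcr01 hcrs
          rw [hcomp']
          intro x hx
          rcases List.mem_append.mp hx with h | h
          · rw [hgetD_stable x (hcomp_sub x h)]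
            exact iforced cr hproper hcr01 hcrs x h
          · rw [hnewcol' x h]
            have hru : ReachE E s u := icomp_reach u hu_comp
            have hadjux : AdjE E u x := (hadj_ns x).mp (hfresh' x h).1
            have hrx : ReachE E s x := .step hru hadjux
            have hne := hproper u x hru hrx hadjux
            have hcu := hcr01 u hru
            have hcx := hcr01 x hrx
            have hfu := iforced cr hproper hcr01 hcrs u hu_comp
            rw [hfu]
            omega
      have hmeasure : st'.q.length +
          ((pvEndpoints E).filter (fun x => !(st'.color.contains x))).length ≤ n := by
        have hdrop : ((pvEndpoints E).filter (fun x => !(st'.color.contains x))).length + new.length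
            ≤ ((pvEndpoints E).filter (fun x => !(color.contains x))).length := by
          apply filter_count_drop (pvEndpoints E) new _ _ hnodup
          · intro x hx
            exact mem_endpoints_of_adj ((hadj_ns x).mp (hfresh' x hx).1)
          · intro x
            by_cases h1 : color.contains x = true <;> by_cases h2 : x ∈ new
            · exact absurd (hfresh' x h2).2 (by simp [h1])
            · simp [hcont' x, h1, h2]
            · simp [hcont' x, h1, h2]
            · simp [hcont' x, h1, h2]
          · intro x hx
            simp [hcont' x, hx]
        have hflen : st'.q.length = rest.length + new.length := by rw [hq']; simp
        have hst_old : (u :: rest).length +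
            ((pvEndpoints E).filter (fun x => !(color.contains x))).length ≤ n + 1 := hf
        simp only [List.length_cons] at hst_old
        omega
      exact ih st' hinv' hmeasure

-- ---------- Section 4: sorting and bucket shape ----------
lemma foldl_add_from01 (xs : List Int) (h : ∀ x ∈ xs, x = 0 ∨ x = 1) :
    xs.foldl PySem.Set.add [0, 1] = [0, 1] := by
  induction xs with
  | nil => rfl
  | cons x xs ih =>
    have hx := h x (by simp)
    have hadd : PySem.Set.add [0, 1] x = [0, 1] := by
      rcases hx with rfl | rfl <;> rfl
    rw [List.foldl_cons, hadd]
    exact ih (fun y hy => h y (by simp [hy]))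

lemma foldl_add_from0 (xs : List Int) (h : ∀ x ∈ xs, x = 0 ∨ x = 1) :
    xs.foldl PySem.Set.add [0] = if (1 : Int) ∈ xs then [0, 1] else [0] := by
  induction xs with
  | nil => rfl
  | cons x xs ih =>
    have hx := h x (by simp)
    rcases hx with rfl | rfl
    · rw [List.foldl_cons, show PySem.Set.add [(0 : Int)] 0 = [0] from rfl,
        ih (fun y hy => h y (by simp [hy]))]
      by_cases h1 : (1 : Int) ∈ xs <;> simp [h1]
    · rw [List.foldl_cons, show PySem.Set.add [(0 : Int)] 1 = [0, 1] from rfl,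
        foldl_add_from01 xs (fun y hy => h y (by simp [hy]))]
      simp

lemma ofList_cons_zero (l : List Int) (h : ∀ x ∈ l, x = 0 ∨ x = 1) :
    PySem.Set.ofList ((0 : Int) :: l) = if (1 : Int) ∈ l then [0, 1] else [0] := by
  rw [PySem.Set.ofList_eq_foldl, List.foldl_cons,
    show PySem.Set.add [] (0 : Int) = [0] from rfl]
  exact foldl_add_from0 l h

lemma aBuckets_eq (s : Int × Int) (comp : List (Int × Int)) (color : PySem.Dict (Int × Int) Int)
    (hhead : ∃ t, comp = s :: t)
    (h01 : ∀ x ∈ comp, color.getD x 0 = 0 ∨ color.getD x 0 = 1)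
    (hs0 : color.getD s 0 = 0) :
    aBuckets comp color =
      (if 2 ≤ (comp.filter (fun u => color.getD u 0 == 0)).length
        then [PySem.List.sorted2 (comp.filter (fun u => color.getD u 0 == 0)) (·.1) (·.2)] else []) ++
      (if 2 ≤ (comp.filter (fun u => color.getD u 0 == 1)).length
        then [PySem.List.sorted2 (comp.filter (fun u => color.getD u 0 == 1)) (·.1) (·.2)] else []) := by
  have hkeys : (comp.foldl (fun d c => d.modify (color.getD c 0) [] (fun l => l ++ [c])) PySem.Dict.empty).keys
      = PySem.Set.ofList (comp.map (fun c => color.getD c 0)) := by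
    rw [PySem.Dict.keys_foldl_modify_key comp (fun c : Int × Int => color.getD c 0) []
      (fun _ c => (fun l => l ++ [c])) PySem.Dict.empty]
    rw [PySem.Dict.keys_empty, PySem.Set.update_nil_left]
  have hnodupkeys : (comp.foldl (fun d c => d.modify (color.getD c 0) [] (fun l => l ++ [c])) PySem.Dict.empty).keys.Nodup := by
    rw [hkeys]; exact PySem.Set.nodup_ofList _
  have hgetD : ∀ c : Int, (comp.foldl (fun d c => d.modify (color.getD c 0) [] (fun l => l ++ [c])) PySem.Dict.empty).getD c []
      = comp.filter (fun x => color.getD x 0 == c) := by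
    intro c
    rw [show (comp.foldl (fun d c => d.modify (color.getD c 0) [] (fun l => l ++ [c])) PySem.Dict.empty)
        = ((comp.map (fun c => (color.getD c 0, c))).foldl
            (fun d p => d.modify p.1 [] (fun l => l ++ [p.2])) PySem.Dict.empty) from by rw [List.foldl_map]]
    rw [PySem.Dict.getD_foldl_modify_append, PySem.Dict.getD_empty]
    rw [List.filter_map]
    rw [show ((fun (p : Int × (Int × Int)) => p.1 == c) ∘ (fun c => (color.getD c 0, c)))
      = (fun x => color.getD x 0 == c) from rfl]
    rw [List.map_map,
      show ((fun (x : Int × (Int × Int)) => x.2) ∘ (fun c : Int × Int => (color.getD c 0, c))) = id from rfl,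
      List.map_id, List.nil_append]
  have hvalues := PySem.Dict.values_eq_map_keys _ hnodupkeys ([] : List (Int × Int))
  unfold aBuckets
  dsimp only
  rw [hvalues, hkeys]
  obtain ⟨t, ht⟩ := hhead
  have hmapcomp : comp.map (fun c => color.getD c 0) = 0 :: t.map (fun c => color.getD c 0) := by
    rw [ht]; simp [hs0]
  have h01t : ∀ x ∈ t.map (fun c => color.getD c 0), x = 0 ∨ x = 1 := by
    intro x hx
    obtain ⟨c, hc, rfl⟩ := List.mem_map.mp hx
    exact h01 c (by rw [ht]; simp [hc])
  rw [hmapcomp, ofList_cons_zero _ h01t]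
  by_cases h1 : (1 : Int) ∈ t.map (fun c => color.getD c 0)
  · rw [if_pos h1]
    simp only [List.map_cons, List.map_nil, hgetD, List.foldl_cons, List.foldl_nil]
    by_cases h2 : 2 ≤ (comp.filter (fun x => color.getD x 0 == 0)).length <;>
      by_cases h3 : 2 ≤ (comp.filter (fun x => color.getD x 0 == 1)).length <;>
      simp [h2, h3]
  · rw [if_neg h1]
    simp only [List.map_cons, List.map_nil, hgetD, List.foldl_cons, List.foldl_nil]
    have hf1 : comp.filter (fun x => color.getD x 0 == 1) = [] := by
      rw [List.filter_eq_nil_iff]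
      intro x hx
      simp only [beq_iff_eq]
      intro hcx
      apply h1
      rw [ht] at hx
      rcases List.mem_cons.mp hx with rfl | hx2
      · rw [hs0] at hcx; cases hcx
      · exact List.mem_map.mpr ⟨x, hx2, hcx⟩
    rw [hf1]
    by_cases h2 : 2 ≤ (comp.filter (fun x => color.getD x 0 == 0)).length <;> simp [h2]

-- ---------- Section 5: characterizing A's outer loop by walks ----------
def OldGoodA (E : List ((Int × Int) × (Int × Int))) (d : PySem.Dict (Int × Int) Int) : Prop :=
  ∀ a v, d.contains a = true → AdjE E a v → d.contains v = true ∧ d.getD a 0 ≠ d.getD v 0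

def Vals01 (d : PySem.Dict (Int × Int) Int) : Prop :=
  ∀ x, d.contains x = true → d.getD x 0 = 0 ∨ d.getD x 0 = 1

def PairIn (acc : List (List (Int × Int))) (u v : Int × Int) : Prop :=
  ∃ cls ∈ acc, u ∈ cls ∧ v ∈ cls

-- along a walk from a colored vertex, a closed proper coloring alternates
lemma walk_color (E : List ((Int × Int) × (Int × Int))) (d : PySem.Dict (Int × Int) Int)
    (hg : OldGoodA E d) (h01 : Vals01 d) {u v : Int × Int} {p : Bool}
    (hw : Walk E u v p) :
    d.contains u = true →
    d.contains v = true ∧ d.getD v 0 = (if p then 1 - d.getD u 0 else d.getD u 0) := by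
  induction hw with
  | nil => intro hu; simp [hu]
  | cons hadj hw ih =>
    intro hu
    rename_i a m w p
    obtain ⟨hm, hne⟩ := hg a m hu hadj
    obtain ⟨hwc, hwv⟩ := ih hm
    refine ⟨hwc, ?_⟩
    rcases h01 a hu with h1 | h1 <;> rcases h01 m hm with h2 | h2 <;>
      cases p <;> simp_all <;> omega

lemma aInit (E : List ((Int × Int) × (Int × Int))) (s : Int × Int)
    (col0 : PySem.Dict (Int × Int) Int) (hnd : col0.keys.Nodup)
    (hfresh : col0.contains s = false) (hold : OldGoodA E col0) :
    AInv E s col0 ⟨col0.insert s 0, [s], [s], true⟩ := by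
  have hne : ∀ x, col0.contains x = true → x ≠ s := by
    intro x hx h
    rw [h, hfresh] at hx; cases hx
  refine ⟨PySem.Dict.nodup_keys_insert _ _ _ hnd, ?_, by simp, ?_, ⟨[], rfl⟩, ?_, ?_, ?_, ?_, ?_, ?_, ?_, ?_⟩
  · intro x
    rw [PySem.Dict.contains_insert]
    by_cases hx : x = s <;> simp [hx, hfresh]
  · intro x hx
    rw [List.mem_singleton] at hx
    rw [hx]; exact hfresh
  · intro x hx
    rw [List.mem_singleton] at hx
    rw [hx]; exact .refl
  · intro x hx
    rw [List.mem_singleton] at hx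
    rw [hx, PySem.Dict.getD_insert_self]
    exact .inl rfl
  · intro x hx
    exact PySem.Dict.get?_insert_of_ne _ _ (hne x hx)
  · rw [PySem.Dict.getD_insert_self]
  · intro x hx
    rw [List.mem_singleton] at hx
    rw [hx]; simp
  · intro _ a ha haq v hadj
    have has : a ≠ s := by
      intro h
      exact haq (by rw [h]; simp)
    have ha0 : col0.contains a = true := by
      rw [PySem.Dict.contains_insert] at ha
      simpa [has] using ha
    obtain ⟨h1, h2⟩ := hold a v ha0 hadj
    have hvs : v ≠ s := hne v h1
    refine ⟨by rw [PySem.Dict.contains_insert]; simp [h1], ?_⟩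
    rw [PySem.Dict.getD_insert, if_neg has, PySem.Dict.getD_insert, if_neg hvs]
    exact h2
  · intro h; cases h
  · intro cr _ _ hcrs x hx
    rw [List.mem_singleton] at hx
    rw [hx, PySem.Dict.getD_insert_self, hcrs]

lemma init_fuel_a (E : List ((Int × Int) × (Int × Int))) (s : Int × Int)
    (col0 : PySem.Dict (Int × Int) Int) :
    (⟨col0.insert s 0, [s], [s], true⟩ : AState).q.length +
      ((pvEndpoints E).filter (fun x => !((col0.insert s 0).contains x))).length
      ≤ 2 * E.length + 2 := by
  have h1 := List.length_filter_le (fun x => !((col0.insert s 0).contains x)) (pvEndpoints E)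
  have h2 := length_endpoints E
  simp only [List.length_singleton]
  omega

lemma two_le_length_of_mem_ne {α : Type} {l : List α} {x y : α}
    (hx : x ∈ l) (hy : y ∈ l) (hne : x ≠ y) : 2 ≤ l.length := by
  match l, hx with
  | [a], hx =>
    rw [List.mem_singleton] at hx hy
    exact absurd (hx.trans hy.symm) hne
  | a :: b :: t, _ => simp

lemma aOuter_main (E : List ((Int × Int) × (Int × Int)))
    (graph : PySem.Dict (Int × Int) (PySem.Set (Int × Int)))
    (hg : ∀ u v, (v ∈ graph.getD u PySem.Set.empty) ↔ AdjE E u v) :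
    ∀ (chords : List (Int × Int)) (col : PySem.Dict (Int × Int) Int)
      (acc : List (List (Int × Int))),
    col.keys.Nodup → OldGoodA E col → Vals01 col →
    (∀ cls ∈ acc, cls.Nodup ∧ 2 ≤ cls.length) →
    (∀ cls ∈ acc, ∀ u ∈ cls, ∀ v ∈ cls, u ≠ v → Walk E u v false) →
    (∀ u v, u ≠ v → col.contains u = true → Walk E u v false → PairIn acc u v) →
    (((aOuter graph (2 * E.length + 2) chords col acc).1 = false → OddSelf E) ∧
     ((aOuter graph (2 * E.length + 2) chords col acc).1 = true →
       ∃ col' : PySem.Dict (Int × Int) Int,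
         OldGoodA E col' ∧ Vals01 col' ∧
         (∀ x, col.contains x = true → col'.contains x = true) ∧
         (∀ x ∈ chords, col'.contains x = true) ∧
         (∀ cls ∈ (aOuter graph (2 * E.length + 2) chords col acc).2, cls.Nodup ∧ 2 ≤ cls.length) ∧
         (∀ cls ∈ (aOuter graph (2 * E.length + 2) chords col acc).2,
            ∀ u ∈ cls, ∀ v ∈ cls, u ≠ v → Walk E u v false) ∧
         (∀ u v, u ≠ v → col'.contains u = true → Walk E u v false →
            PairIn (aOuter graph (2 * E.length + 2) chords col acc).2 u v))) := by
  intro chords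
  induction chords with
  | nil =>
    intro col acc hnd hold hvals haccN haccS haccC
    constructor
    · intro h
      rw [show (aOuter graph (2 * E.length + 2) [] col acc).1 = true from rfl] at h
      cases h
    · intro _
      exact ⟨col, hold, hvals, fun _ hx => hx, by simp, haccN, haccS, haccC⟩
  | cons s rest ih =>
    intro col acc hnd hold hvals haccN haccS haccC
    by_cases hc : col.contains s = true
    · rw [show aOuter graph (2 * E.length + 2) (s :: rest) col acc
          = aOuter graph (2 * E.length + 2) rest col acc from by rw [aOuter, if_pos hc]]
      obtain ⟨h1, h2⟩ := ih col acc hnd hold hvals haccN haccS haccC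
      refine ⟨h1, fun ht => ?_⟩
      obtain ⟨col', p1, p2, p3, p4, p5, p6, p7⟩ := h2 ht
      refine ⟨col', p1, p2, p3, ?_, p5, p6, p7⟩
      intro x hx
      rcases List.mem_cons.mp hx with rfl | hx
      · exact p3 x hc
      · exact p4 x hx
    · have hc' : col.contains s = false := by simpa using hc
      set st := aBfs graph (2 * E.length + 2) ⟨col.insert s 0, [s], [s], true⟩ with hst
      obtain ⟨inv, hq⟩ : AInv E s col st ∧ st.q = [] := by
        rw [hst]
        exact aBfs_run E graph hg s col (2 * E.length + 2) _
          (aInit E s col hnd hc' hold) (init_fuel_a E s col)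
      clear_value st
      have hunfold : aOuter graph (2 * E.length + 2) (s :: rest) col acc
          = (if st.bip = false then (false, [])
             else aOuter graph (2 * E.length + 2) rest st.color (acc ++ aBuckets st.comp st.color)) := by
        rw [hst, aOuter, if_neg (by rw [hc']; simp)]
      rw [hunfold]
      cases hbip : st.bip with
      | false =>
        rw [if_pos rfl]
        constructor
        · intro _
          by_contra hodd
          obtain ⟨cr, hproper, hcr01, hcrs⟩ := proper_of_no_odd E hodd s
          obtain ⟨u, v, hu, hadj, hvc, heqc⟩ := inv.bad hbip
          have hvcomp : v ∈ st.comp := by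
            rw [inv.keys_eq] at hvc
            rcases Bool.or_eq_true_iff.mp hvc with h | h
            · exfalso
              have h2 := (hold v u h (AdjE_symm hadj)).1
              rw [inv.comp_fresh u hu] at h2
              cases h2
            · exact of_decide_eq_true h
          have h1 := inv.forced cr hproper hcr01 hcrs u hu
          have h2 := inv.forced cr hproper hcr01 hcrs v hvcomp
          exact hproper u v (inv.comp_reach u hu) (inv.comp_reach v hvcomp) hadj
            (by rw [← h1, ← h2, heqc])
        · intro h; cases h
      | true =>
        rw [if_neg (by simp)]
        have hOG : OldGoodA E st.color := by
          intro a v ha hadj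
          exact inv.closed hbip a ha (by rw [hq]; simp) v hadj
        have hmono : ∀ x, col.contains x = true → st.color.contains x = true := by
          intro x hx
          rw [inv.keys_eq, hx]; rfl
        have hstable : ∀ x, col.contains x = true → st.color.getD x 0 = col.getD x 0 := by
          intro x hx
          rw [PySem.Dict.getD_eq_get?_getD, inv.col_old x hx, ← PySem.Dict.getD_eq_get?_getD]
        have hV : Vals01 st.color := by
          intro x hx
          rw [inv.keys_eq] at hx
          rcases Bool.or_eq_true_iff.mp hx with h | h
          · rw [hstable x h]; exact hvals x h
          · exact inv.col01 x (of_decide_eq_true h)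
        have hscomp : s ∈ st.comp := by
          obtain ⟨t, ht⟩ := inv.comp_head
          rw [ht]; simp
        have hscol : st.color.contains s = true := by
          rw [inv.keys_eq]; simp [hscomp]
        -- parity of walks from s determines the color
        have hparity : ∀ x ∈ st.comp, ∀ p : Bool, Walk E s x p →
            st.color.getD x 0 = (if p then 1 else 0) := by
          intro x _ p hw
          obtain ⟨_, h2⟩ := walk_color E st.color hOG hV hw hscol
          rw [h2, inv.col_s]
          cases p <;> simp
        -- members of one bucket class are pairwise evenly connected
        have hclsmem : ∀ cls ∈ aBuckets st.comp st.color, ∃ c : Int,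
            cls = PySem.List.sorted2 (st.comp.filter (fun u => st.color.getD u 0 == c)) (·.1) (·.2) ∧
            2 ≤ (st.comp.filter (fun u => st.color.getD u 0 == c)).length := by
          intro cls hcls
          rw [aBuckets_eq s st.comp st.color inv.comp_head inv.col01 inv.col_s] at hcls
          rcases List.mem_append.mp hcls with h | h
          · by_cases hg0 : 2 ≤ (st.comp.filter (fun u => st.color.getD u 0 == 0)).length
            · rw [if_pos hg0] at h
              rw [List.mem_singleton] at h
              exact ⟨0, h, hg0⟩
            · rw [if_neg hg0] at h; cases h
          · by_cases hg1 : 2 ≤ (st.comp.filter (fun u => st.color.getD u 0 == 1)).length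
            · rw [if_pos hg1] at h
              rw [List.mem_singleton] at h
              exact ⟨1, h, hg1⟩
            · rw [if_neg hg1] at h; cases h
        have hbN : ∀ cls ∈ aBuckets st.comp st.color, cls.Nodup ∧ 2 ≤ cls.length := by
          intro cls hcls
          obtain ⟨c, hcls', hlen⟩ := hclsmem cls hcls
          subst hcls'
          constructor
          · exact (PySem.List.sorted2_perm _ _ _ _).nodup_iff.mpr (inv.comp_nodup.filter _)
          · rw [(PySem.List.sorted2_perm _ _ _ _).length_eq]
            exact hlen
        have hbS : ∀ cls ∈ aBuckets st.comp st.color, ∀ u ∈ cls, ∀ v ∈ cls, u ≠ v →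
            Walk E u v false := by
          intro cls hcls u hu v hv _
          obtain ⟨c, hcls', _⟩ := hclsmem cls hcls
          subst hcls'
          have hu' := List.mem_filter.mp ((PySem.List.sorted2_perm _ _ _ _).mem_iff.mp hu)
          have hv' := List.mem_filter.mp ((PySem.List.sorted2_perm _ _ _ _).mem_iff.mp hv)
          obtain ⟨p, hwp⟩ := reach_walk (inv.comp_reach u hu'.1)
          obtain ⟨q, hwq⟩ := reach_walk (inv.comp_reach v hv'.1)
          have h1 := hparity u hu'.1 p hwp
          have h2 := hparity v hv'.1 q hwq
          have hcu : st.color.getD u 0 = c := by simpa using hu'.2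
          have hcv : st.color.getD v 0 = c := by simpa using hv'.2
          have hpq : p = q := by
            rw [hcu] at h1
            rw [hcv] at h2
            rw [h1] at h2
            cases p <;> cases q
            · rfl
            · exact absurd h2 (by norm_num)
            · exact absurd h2 (by norm_num)
            · rfl
          subst hpq
          have := walk_trans (walk_symm hwp) hwq
          simpa using this
        have hcomplete : ∀ u v, u ≠ v → st.color.contains u = true → Walk E u v false →
            PairIn (acc ++ aBuckets st.comp st.color) u v := by
          intro u v hne hu hw
          have hu' := hu
          rw [inv.keys_eq] at hu'
          rcases Bool.or_eq_true_iff.mp hu' with hold_u | hcomp_u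
          · obtain ⟨hvc, _⟩ := walk_color E col hold hvals hw hold_u
            obtain ⟨cls, h1, h2⟩ := haccC u v hne hold_u hw
            exact ⟨cls, List.mem_append.mpr (.inl h1), h2⟩
          · have hucomp : u ∈ st.comp := of_decide_eq_true hcomp_u
            obtain ⟨hvcol, hveq⟩ := walk_color E st.color hOG hV hw hu
            have hvcomp : v ∈ st.comp := by
              have hv' := hvcol
              rw [inv.keys_eq] at hv'
              rcases Bool.or_eq_true_iff.mp hv' with hold_v | h
              · exfalso
                obtain ⟨h2, _⟩ := walk_color E col hold hvals (walk_symm hw) hold_v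
                rw [inv.comp_fresh u hucomp] at h2
                cases h2
              · exact of_decide_eq_true h
            have hveq' : st.color.getD v 0 = st.color.getD u 0 := by simpa using hveq
            set c := st.color.getD u 0 with hcdef
            have humem : u ∈ st.comp.filter (fun x => st.color.getD x 0 == c) :=
              List.mem_filter.mpr ⟨hucomp, by simp [hcdef]⟩
            have hvmem : v ∈ st.comp.filter (fun x => st.color.getD x 0 == c) :=
              List.mem_filter.mpr ⟨hvcomp, by simp [hveq']⟩
            have hlen : 2 ≤ (st.comp.filter (fun x => st.color.getD x 0 == c)).length :=
              two_le_length_of_mem_ne humem hvmem hne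
            have hclsin : PySem.List.sorted2 (st.comp.filter (fun x => st.color.getD x 0 == c)) (·.1) (·.2)
                ∈ aBuckets st.comp st.color := by
              rw [aBuckets_eq s st.comp st.color inv.comp_head inv.col01 inv.col_s]
              rcases inv.col01 u hucomp with h0 | h0
              · apply List.mem_append.mpr (.inl _)
                rw [← hcdef] at h0
                rw [h0] at hlen ⊢
                rw [if_pos hlen]
                simp
              · apply List.mem_append.mpr (.inr _)
                rw [← hcdef] at h0
                rw [h0] at hlen ⊢
                rw [if_pos hlen]
                simp
            exact ⟨_, List.mem_append.mpr (.inr hclsin),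
              (PySem.List.sorted2_perm _ _ _ _).mem_iff.mpr humem,
              (PySem.List.sorted2_perm _ _ _ _).mem_iff.mpr hvmem⟩
        obtain ⟨h1, h2⟩ := ih st.color (acc ++ aBuckets st.comp st.color) inv.keys_nodup hOG hV
          (by
            intro cls hcls
            rcases List.mem_append.mp hcls with h | h
            · exact haccN cls h
            · exact hbN cls h)
          (by
            intro cls hcls
            rcases List.mem_append.mp hcls with h | h
            · exact haccS cls h
            · exact hbS cls h)
          hcomplete
        refine ⟨h1, fun ht => ?_⟩
        obtain ⟨col', p1, p2, p3, p4, p5, p6, p7⟩ := h2 ht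
        refine ⟨col', p1, p2, fun x hx => p3 x (hmono x hx), ?_, p5, p6, p7⟩
        intro x hx
        rcases List.mem_cons.mp hx with rfl | hx
        · exact p3 x hscol
        · exact p4 x hx

-- ---------- Section 6: edge endpoints are chords of the 8 points (under Pre_) ----------
def InC8 (ch : Int × Int) : Prop := 0 ≤ ch.1 ∧ ch.1 < ch.2 ∧ ch.2 < 8

def pvRowOf (rows : List (List Int)) (i : Int) : List Int := (PySem.List.pyGet? rows i).getD []

lemma bCommon_eq_map (ri rj : List Int) :
    bCommon ri rj = (pvCommonPre ri rj).map (fun k : Nat => (k : Int)) := by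
  unfold bCommon pvCommonPre
  rw [show (min (ri.length : Int) (rj.length : Int)) = ((min ri.length rj.length : Nat) : Int) from by
    push_cast; rfl]
  rw [PySem.List.pyRange_one]
  rw [show (((min ri.length rj.length : Nat) : Int) - 0).toNat = min ri.length rj.length from by omega]
  rw [show (fun k : Nat => (0 : Int) + (k : Int)) = (fun k : Nat => (k : Int)) from by funext k; omega]
  rw [List.filter_map]
  congr 1
  apply List.filter_congr
  intro k _
  simp only [Function.comp_apply, PySem.List.pyGetD_natCast]
  by_cases h1 : ri.getD k 0 = 0 <;> by_cases h2 : rj.getD k 0 = 0 <;> simp [h1, h2]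

lemma bEdges_flat (rows : List (List Int)) :
    bEdges rows = (PySem.List.pyRange 0 8 1).flatMap (fun i =>
      ((PySem.List.pyRange (i + 1) 8 1).filter
        (fun j => decide ((bCommon (pvRowOf rows i) (pvRowOf rows j)).length = 2))).map
        (fun j => ((i, j), (PySem.List.pyGetD (bCommon (pvRowOf rows i) (pvRowOf rows j)) 0 0,
          PySem.List.pyGetD (bCommon (pvRowOf rows i) (pvRowOf rows j)) 1 0)))) := by
  unfold bEdges
  have hinner : ∀ (i : Int) (out : List ((Int × Int) × (Int × Int))),
      (PySem.List.pyRange (i + 1) 8 1).foldl (fun out j =>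
        if (bCommon (pvRowOf rows i) (pvRowOf rows j)).length = 2 then
          out ++ [((i, j), (PySem.List.pyGetD (bCommon (pvRowOf rows i) (pvRowOf rows j)) 0 0,
            PySem.List.pyGetD (bCommon (pvRowOf rows i) (pvRowOf rows j)) 1 0))]
        else out) out
      = out ++ ((PySem.List.pyRange (i + 1) 8 1).filter
          (fun j => decide ((bCommon (pvRowOf rows i) (pvRowOf rows j)).length = 2))).map
          (fun j => ((i, j), (PySem.List.pyGetD (bCommon (pvRowOf rows i) (pvRowOf rows j)) 0 0,
            PySem.List.pyGetD (bCommon (pvRowOf rows i) (pvRowOf rows j)) 1 0))) := by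
    intro i out
    exact PySem.List.foldl_append_ite _ _ _ _
  calc (PySem.List.pyRange 0 8 1).foldl (fun out i =>
        (PySem.List.pyRange (i + 1) 8 1).foldl (fun out j =>
          if (bCommon (pvRowOf rows i) (pvRowOf rows j)).length = 2 then
            out ++ [((i, j), (PySem.List.pyGetD (bCommon (pvRowOf rows i) (pvRowOf rows j)) 0 0,
              PySem.List.pyGetD (bCommon (pvRowOf rows i) (pvRowOf rows j)) 1 0))]
          else out) out) []
      = (PySem.List.pyRange 0 8 1).foldl (fun out i =>
          out ++ ((PySem.List.pyRange (i + 1) 8 1).filter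
            (fun j => decide ((bCommon (pvRowOf rows i) (pvRowOf rows j)).length = 2))).map
            (fun j => ((i, j), (PySem.List.pyGetD (bCommon (pvRowOf rows i) (pvRowOf rows j)) 0 0,
              PySem.List.pyGetD (bCommon (pvRowOf rows i) (pvRowOf rows j)) 1 0)))) [] := by
        apply PySem.List.foldl_congr_mem
        intro acc i _
        exact hinner i acc
    _ = _ := by
        rw [PySem.List.foldl_append_eq_flatMap]
        simp

lemma pvRowOf_eq_getD (rows : List (List Int)) (i : Int) (h0 : 0 ≤ i) (h8 : i < 8)
    (hlen : 8 ≤ rows.length) :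
    pvRowOf rows i = rows.getD i.toNat [] := by
  unfold pvRowOf
  rw [show i = (i.toNat : Int) from by omega]
  have hp : PySem.List.pyGet? rows ((i.toNat : Nat) : Int) = rows[i.toNat]? := by
    simp [pysem]
    congr 1
    omega
  rw [hp, List.getD_eq_getElem?_getD]
  rw [show ((i.toNat : Int)).toNat = i.toNat from by omega]

lemma endpoints_C8 (rows : List (List Int)) (hpre : Pre_cyclic_order_kill rows) :
    ∀ c ∈ pvEndpoints (bEdges rows), InC8 c := by
  obtain ⟨hlen, hcol⟩ := hpre
  intro c hc
  unfold pvEndpoints at hc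
  rw [List.mem_flatMap] at hc
  obtain ⟨e, he, hce⟩ := hc
  rw [bEdges_flat rows, List.mem_flatMap] at he
  obtain ⟨i, hi, he2⟩ := he
  rw [List.mem_map] at he2
  obtain ⟨j, hj, he3⟩ := he2
  rw [List.mem_filter] at hj
  obtain ⟨hjr, hjc⟩ := hj
  rw [PySem.List.mem_pyRange_one] at hi hjr
  have hij : 0 ≤ i ∧ i < j ∧ j < 8 := ⟨hi.1, by omega, hjr.2⟩
  have hcomlen : (bCommon (pvRowOf rows i) (pvRowOf rows j)).length = 2 := of_decide_eq_true hjc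
  rcases List.mem_cons.mp hce with rfl | hce2
  · rw [← he3]
    exact ⟨hij.1, hij.2.1, hij.2.2⟩
  · rcases List.mem_cons.mp hce2 with rfl | hce3
    · rw [← he3]
      set com := bCommon (pvRowOf rows i) (pvRowOf rows j) with hcom
      have hpl : com.Pairwise (· < ·) := pairwise_lt_bCommon _ _
      have h0 : PySem.List.pyGetD com 0 (0 : Int) = com[0] :=
        PySem.List.pyGetD_eq_getElem com 0 (by omega) (by rw [hcomlen]; omega)
      have h1 : PySem.List.pyGetD com 1 (0 : Int) = com[1] :=
        PySem.List.pyGetD_eq_getElem com 0 (by omega) (by rw [hcomlen]; omega)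
      have hlt : com[0] < com[1] := by
        have := List.pairwise_iff_getElem.mp hpl 0 1 (by omega) (by omega) (by omega)
        exact this
      have hmem8 : ∀ x ∈ com, 0 ≤ x ∧ x < 8 := by
        intro x hx
        rw [hcom, bCommon_eq_map, List.mem_map] at hx
        obtain ⟨k, hk, rfl⟩ := hx
        refine ⟨by omega, ?_⟩
        have hri : pvRowOf rows i = rows.getD i.toNat [] :=
          pvRowOf_eq_getD rows i hij.1 (by omega) hlen
        have hrj : pvRowOf rows j = rows.getD j.toNat [] :=
          pvRowOf_eq_getD rows j (by omega) hij.2.2 hlen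
        have hklen : (pvCommonPre (rows.getD i.toNat []) (rows.getD j.toNat [])).length = 2 := by
          have h' := hcomlen
          rw [hcom, bCommon_eq_map, List.length_map, hri, hrj] at h'
          exact h'
        have hcol' := hcol j.toNat (by omega) i.toNat (by omega) hklen
        rw [hri, hrj] at hk
        have hk8 := hcol' k hk
        omega
      have hm0 : com[0] ∈ com := List.getElem_mem _
      have hm1 : com[1] ∈ com := List.getElem_mem _
      rw [h0, h1]
      exact ⟨(hmem8 _ hm0).1, hlt, (hmem8 _ hm1).2⟩
    · cases hce3

lemma mem_pvChords_of_InC8 (c : Int × Int) (h : InC8 c) : c ∈ pvChords := by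
  obtain ⟨h1, h2, h3⟩ := h
  unfold pvChords
  rw [List.mem_flatMap]
  refine ⟨c.1, ?_, ?_⟩
  · rw [PySem.List.mem_pyRange_one]; omega
  · rw [List.mem_map]
    exact ⟨c.2, by rw [PySem.List.mem_pyRange_one]; omega, rfl⟩

-- A's result characterized: bipartite flag = no odd closed walk; classes = even-walk pairs
lemma A_main (rows : List (List Int)) (hpre : Pre_cyclic_order_kill rows) :
    ((aOuter (aGraph (bEdges rows)) (2 * (bEdges rows).length + 2) pvChords PySem.Dict.empty []).1
        = false ↔ OddSelf (bEdges rows)) ∧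
    ((aOuter (aGraph (bEdges rows)) (2 * (bEdges rows).length + 2) pvChords PySem.Dict.empty []).1
        = true →
      ((∀ cls ∈ (aOuter (aGraph (bEdges rows)) (2 * (bEdges rows).length + 2) pvChords PySem.Dict.empty []).2,
          cls.Nodup ∧ 2 ≤ cls.length) ∧
       (∀ u v, u ≠ v →
          (Walk (bEdges rows) u v false ↔
            PairIn (aOuter (aGraph (bEdges rows)) (2 * (bEdges rows).length + 2) pvChords PySem.Dict.empty []).2 u v)))) := by
  set E := bEdges rows with hE
  have hmain := aOuter_main E (aGraph E) (mem_aGraph E) pvChords PySem.Dict.empty []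
    PySem.Dict.nodup_keys_empty
    (by intro a v ha _; rw [PySem.Dict.contains_empty] at ha; cases ha)
    (by intro x hx; rw [PySem.Dict.contains_empty] at hx; cases hx)
    (by intro cls hcls; cases hcls)
    (by intro cls hcls; cases hcls)
    (by intro u v _ hu _; rw [PySem.Dict.contains_empty] at hu; cases hu)
  obtain ⟨hfalse, htrue⟩ := hmain
  have hC8 := endpoints_C8 rows hpre
  constructor
  · constructor
    · exact hfalse
    · intro hodd
      by_contra hne
      have ht : (aOuter (aGraph E) (2 * E.length + 2) pvChords PySem.Dict.empty []).1 = true := by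
        cases h : (aOuter (aGraph E) (2 * E.length + 2) pvChords PySem.Dict.empty []).1
        · exact absurd h hne
        · rfl
      obtain ⟨col', p1, p2, _, p4, _, _, _⟩ := htrue ht
      obtain ⟨v, hwv⟩ := hodd
      have hvmem : v ∈ pvEndpoints E := by
        rcases walk_endpoints hwv with ⟨h, _⟩ | ⟨h, _⟩
        · cases h
        · exact h
      have hvcol : col'.contains v = true :=
        p4 v (mem_pvChords_of_InC8 v (hC8 v hvmem))
      obtain ⟨_, hval⟩ := walk_color E col' p1 p2 hwv hvcol
      simp only [if_true] at hval
      omega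
  · intro ht
    obtain ⟨col', p1, p2, _, p4, p5, p6, p7⟩ := htrue ht
    refine ⟨p5, ?_⟩
    intro u v hne
    constructor
    · intro hw
      have humem : u ∈ pvEndpoints E := by
        rcases walk_endpoints hw with ⟨_, h⟩ | ⟨h, _⟩
        · exact absurd h hne
        · exact h
      exact p7 u v hne (p4 u (mem_pvChords_of_InC8 u (hC8 u humem))) hw
    · intro hp
      obtain ⟨cls, h1, h2, h3⟩ := hp
      exact p6 cls h1 u h2 v h3 hne

-- ---------- Section 7: B's parity closure computes walk-reachability ----------
lemma set_add_length_fresh {α : Type} [BEq α] [LawfulBEq α] (s : PySem.Set α) (x : α)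
    (h : x ∉ s) : (PySem.Set.add s x).length = s.length + 1 := by
  rw [PySem.Set.add_of_not_mem h]
  simp

def CInv (E : List ((Int × Int) × (Int × Int))) (verts : List (Int × Int)) (st : CSt) : Prop :=
  st.ev.Nodup ∧ st.od.Nodup ∧
  (∀ q ∈ st.ev, Walk E q.1 q.2 false ∧ q.1 ∈ verts ∧ q.2 ∈ verts) ∧
  (∀ q ∈ st.od, Walk E q.1 q.2 true ∧ q.1 ∈ verts ∧ q.2 ∈ verts) ∧
  (∀ v ∈ verts, (v, v) ∈ st.ev)

lemma contains_false_of_not_mem {α : Type} [BEq α] [LawfulBEq α] {s : PySem.Set α} {x : α}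
    (h : x ∉ s) : PySem.Set.contains s x = false := by
  cases hc : PySem.Set.contains s x
  · rfl
  · exact absurd ((PySem.Set.contains_iff _ _).mp hc) h

lemma cW_cases (e : (Int × Int) × (Int × Int)) (st : CSt) (w : Int × Int) :
    (cW e st w = st ∧ (cW e st w).ch = st.ch ∧
      ((e.2, w) ∈ st.ev → (e.1, w) ∈ st.od) ∧ ((e.2, w) ∈ st.od → (e.1, w) ∈ st.ev)) ∨
    (cW e st w).ch = true ∧
    (((cW e st w).ev = st.ev ∧ (cW e st w).od = PySem.Set.add st.od (e.1, w) ∧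
        (e.1, w) ∉ st.od ∧ (e.2, w) ∈ st.ev) ∨
     ((cW e st w).ev = PySem.Set.add st.ev (e.1, w) ∧ (cW e st w).od = st.od ∧
        (e.1, w) ∉ st.ev ∧ (e.2, w) ∈ st.od) ∨
     ((cW e st w).ev = PySem.Set.add st.ev (e.1, w) ∧
        (cW e st w).od = PySem.Set.add st.od (e.1, w) ∧
        (e.1, w) ∉ st.ev ∧ (e.1, w) ∉ st.od ∧ (e.2, w) ∈ st.ev ∧ (e.2, w) ∈ st.od)) := by
  obtain ⟨ev, od, ch⟩ := st
  by_cases h1 : (PySem.Set.contains ev (e.2, w) && !(PySem.Set.contains od (e.1, w))) = true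
  · have hm1 : (e.2, w) ∈ ev ∧ (e.1, w) ∉ od := by
      rw [Bool.and_eq_true] at h1
      refine ⟨(PySem.Set.contains_iff _ _).mp h1.1, fun hmem => ?_⟩
      have := h1.2
      rw [(PySem.Set.contains_iff _ _).mpr hmem] at this
      cases this
    by_cases h2 : (PySem.Set.contains (PySem.Set.add od (e.1, w)) (e.2, w)
        && !(PySem.Set.contains ev (e.1, w))) = true
    · have hcw : cW e ⟨ev, od, ch⟩ w
          = ⟨PySem.Set.add ev (e.1, w), PySem.Set.add od (e.1, w), true⟩ := by
        simp only [cW]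
        rw [if_pos h1]
        dsimp only
        rw [if_pos h2]
      have hm2 : (e.2, w) ∈ PySem.Set.add od (e.1, w) ∧ (e.1, w) ∉ ev := by
        rw [Bool.and_eq_true] at h2
        refine ⟨(PySem.Set.contains_iff _ _).mp h2.1, fun hmem => ?_⟩
        have := h2.2
        rw [(PySem.Set.contains_iff _ _).mpr hmem] at this
        cases this
      -- the freshly-added odd element cannot be the one tested, else guard 2 would fail
      have hodm : (e.2, w) ∈ od := by
        rcases (PySem.Set.mem_add _ _ _).mp hm2.1 with h | h
        · exact h
        · exact absurd (h ▸ hm1.1) hm2.2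
      right
      rw [hcw]
      exact ⟨rfl, .inr (.inr ⟨rfl, rfl, hm2.2, hm1.2, hm1.1, hodm⟩)⟩
    · have hcw : cW e ⟨ev, od, ch⟩ w = ⟨ev, PySem.Set.add od (e.1, w), true⟩ := by
        simp only [cW]
        rw [if_pos h1]
        dsimp only
        rw [if_neg h2]
      right
      rw [hcw]
      exact ⟨rfl, .inl ⟨rfl, rfl, hm1.2, hm1.1⟩⟩
  · by_cases h2 : (PySem.Set.contains od (e.2, w) && !(PySem.Set.contains ev (e.1, w))) = true
    · have hm2 : (e.2, w) ∈ od ∧ (e.1, w) ∉ ev := by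
        rw [Bool.and_eq_true] at h2
        refine ⟨(PySem.Set.contains_iff _ _).mp h2.1, fun hmem => ?_⟩
        have := h2.2
        rw [(PySem.Set.contains_iff _ _).mpr hmem] at this
        cases this
      have hcw : cW e ⟨ev, od, ch⟩ w = ⟨PySem.Set.add ev (e.1, w), od, true⟩ := by
        simp only [cW]
        rw [if_neg h1]
        dsimp only
        rw [if_pos h2]
      right
      rw [hcw]
      exact ⟨rfl, .inr (.inl ⟨rfl, rfl, hm2.2, hm2.1⟩)⟩
    · have hcw : cW e ⟨ev, od, ch⟩ w = ⟨ev, od, ch⟩ := by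
        simp only [cW]
        rw [if_neg h1]
        dsimp only
        rw [if_neg h2]
      left
      refine ⟨hcw, by rw [hcw], ?_, ?_⟩
      · intro hm
        by_contra hno
        apply h1
        rw [Bool.and_eq_true]
        exact ⟨(PySem.Set.contains_iff _ _).mpr hm, by rw [contains_false_of_not_mem hno]; rfl⟩
      · intro hm
        by_contra hno
        apply h2
        rw [Bool.and_eq_true]
        exact ⟨(PySem.Set.contains_iff _ _).mpr hm, by rw [contains_false_of_not_mem hno]; rfl⟩

lemma cW_cinv (E : List ((Int × Int) × (Int × Int))) (verts : List (Int × Int))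
    (e : (Int × Int) × (Int × Int)) (he : AdjE E e.1 e.2) (he1 : e.1 ∈ verts)
    (st : CSt) (w : Int × Int) (hw : w ∈ verts) (hinv : CInv E verts st) :
    CInv E verts (cW e st w) := by
  obtain ⟨hn1, hn2, hs1, hs2, hdg⟩ := hinv
  rcases cW_cases e st w with ⟨heq, _⟩ | ⟨_, hcase⟩
  · rw [heq]; exact ⟨hn1, hn2, hs1, hs2, hdg⟩
  · have hnew_od : (e.2, w) ∈ st.ev → Walk E (e.1, w).1 (e.1, w).2 true := by
      intro hm
      have := (hs1 _ hm).1
      exact Walk.cons he this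
    have hnew_ev : (e.2, w) ∈ st.od → Walk E (e.1, w).1 (e.1, w).2 false := by
      intro hm
      have := (hs2 _ hm).1
      have h2 := Walk.cons he this
      simpa using h2
    rcases hcase with ⟨hev, hod, hf, hm⟩ | ⟨hev, hod, hf, hm⟩ | ⟨hev, hod, hf1, hf2, hm1, hm2⟩
    · refine ⟨by rw [hev]; exact hn1, by rw [hod]; exact PySem.Set.nodup_add _ _ hn2, ?_, ?_, ?_⟩
      · rw [hev]; exact hs1
      · rw [hod]
        intro q hq
        rcases (PySem.Set.mem_add _ _ _).mp hq with h | h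
        · exact hs2 q h
        · subst h
          exact ⟨hnew_od hm, he1, hw⟩
      · intro v hv
        rw [hev]; exact hdg v hv
    · refine ⟨by rw [hev]; exact PySem.Set.nodup_add _ _ hn1, by rw [hod]; exact hn2, ?_, ?_, ?_⟩
      · rw [hev]
        intro q hq
        rcases (PySem.Set.mem_add _ _ _).mp hq with h | h
        · exact hs1 q h
        · subst h
          exact ⟨hnew_ev hm, he1, hw⟩
      · rw [hod]; exact hs2
      · intro v hv
        rw [hev]
        exact (PySem.Set.mem_add _ _ _).mpr (.inl (hdg v hv))
    · refine ⟨by rw [hev]; exact PySem.Set.nodup_add _ _ hn1,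
        by rw [hod]; exact PySem.Set.nodup_add _ _ hn2, ?_, ?_, ?_⟩
      · rw [hev]
        intro q hq
        rcases (PySem.Set.mem_add _ _ _).mp hq with h | h
        · exact hs1 q h
        · subst h
          exact ⟨hnew_ev hm2, he1, hw⟩
      · rw [hod]
        intro q hq
        rcases (PySem.Set.mem_add _ _ _).mp hq with h | h
        · exact hs2 q h
        · subst h
          exact ⟨hnew_od hm1, he1, hw⟩
      · intro v hv
        rw [hev]
        exact (PySem.Set.mem_add _ _ _).mpr (.inl (hdg v hv))

lemma cW_admin (e : (Int × Int) × (Int × Int)) (st : CSt) (w : Int × Int) :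
    (st.ch = true → (cW e st w).ch = true) ∧
    st.ev.length + st.od.length ≤ (cW e st w).ev.length + (cW e st w).od.length ∧
    ((cW e st w).ch = false → (cW e st w = st ∧
       ((e.2, w) ∈ st.ev → (e.1, w) ∈ st.od) ∧ ((e.2, w) ∈ st.od → (e.1, w) ∈ st.ev))) ∧
    (st.ch = false → (cW e st w).ch = true →
       st.ev.length + st.od.length < (cW e st w).ev.length + (cW e st w).od.length) := by
  rcases cW_cases e st w with ⟨heq, hch, hi1, hi2⟩ | ⟨hch, hcase⟩
  · refine ⟨fun h => by rw [hch, h], by rw [heq], fun _ => ⟨heq, hi1, hi2⟩, fun h1 h2 => ?_⟩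
    rw [hch, h1] at h2
    cases h2
  · have hlen : st.ev.length + st.od.length < (cW e st w).ev.length + (cW e st w).od.length := by
      rcases hcase with ⟨hev, hod, hf, _⟩ | ⟨hev, hod, hf, _⟩ | ⟨hev, hod, hf1, hf2, _, _⟩ <;>
        rw [hev, hod]
      · have := set_add_length_fresh _ _ hf
        omega
      · have := set_add_length_fresh _ _ hf
        omega
      · have := set_add_length_fresh _ _ hf1
        have := set_add_length_fresh _ _ hf2
        omega
    refine ⟨fun _ => hch, le_of_lt hlen, fun hf => absurd (hch.symm.trans hf) (by simp),
      fun _ _ => hlen⟩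

lemma foldl_cW_cinv (E : List ((Int × Int) × (Int × Int))) (verts : List (Int × Int))
    (e : (Int × Int) × (Int × Int)) (he : AdjE E e.1 e.2) (he1 : e.1 ∈ verts) :
    ∀ (ws : List (Int × Int)), (∀ w ∈ ws, w ∈ verts) →
    ∀ st : CSt, CInv E verts st → CInv E verts (ws.foldl (cW e) st) := by
  intro ws
  induction ws with
  | nil => intro _ st hinv; exact hinv
  | cons w ws ih =>
    intro hmem st hinv
    rw [List.foldl_cons]
    exact ih (fun x hx => hmem x (by simp [hx])) _
      (cW_cinv E verts e he he1 st w (hmem w (by simp)) hinv)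

lemma foldl_cW_admin (e : (Int × Int) × (Int × Int)) :
    ∀ (ws : List (Int × Int)) (st : CSt),
    (st.ch = true → (ws.foldl (cW e) st).ch = true) ∧
    st.ev.length + st.od.length ≤ (ws.foldl (cW e) st).ev.length + (ws.foldl (cW e) st).od.length ∧
    ((ws.foldl (cW e) st).ch = false → (ws.foldl (cW e) st = st ∧
       ∀ w ∈ ws, ((e.2, w) ∈ st.ev → (e.1, w) ∈ st.od) ∧ ((e.2, w) ∈ st.od → (e.1, w) ∈ st.ev))) ∧
    (st.ch = false → (ws.foldl (cW e) st).ch = true →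
       st.ev.length + st.od.length < (ws.foldl (cW e) st).ev.length + (ws.foldl (cW e) st).od.length) := by
  intro ws
  induction ws with
  | nil =>
    intro st
    refine ⟨fun h => h, by simp, fun _ => ⟨by simp, by simp⟩, fun h1 h2 => ?_⟩
    simp only [List.foldl_nil] at h2
    rw [h1] at h2
    cases h2
  | cons w ws ih =>
    intro st
    rw [List.foldl_cons]
    obtain ⟨c1, c2, c3, c4⟩ := cW_admin e st w
    obtain ⟨i1, i2, i3, i4⟩ := ih (cW e st w)
    refine ⟨fun h => i1 (c1 h), le_trans c2 i2, ?_, ?_⟩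
    · intro hf
      have hc : (cW e st w).ch = false := by
        cases hc : (cW e st w).ch
        · rfl
        · rw [i1 hc] at hf; cases hf
      obtain ⟨heq, hcond⟩ := c3 hc
      rw [heq] at hf ⊢
      obtain ⟨j1, j2, j3, j4⟩ := ih st
      obtain ⟨heq2, hcond2⟩ := j3 hf
      refine ⟨heq2, ?_⟩
      intro x hx
      rcases List.mem_cons.mp hx with rfl | hx
      · exact hcond
      · exact hcond2 x hx
    · intro h0 ht
      cases hc : (cW e st w).ch
      · obtain ⟨heq, _⟩ := c3 hc
        rw [heq] at ht ⊢
        exact (ih st).2.2.2 h0 ht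
      · exact lt_of_lt_of_le (c4 h0 hc) i2

lemma cRound_cinv (E : List ((Int × Int) × (Int × Int))) (verts : List (Int × Int)) :
    ∀ (sym' : List ((Int × Int) × (Int × Int))),
    (∀ e ∈ sym', AdjE E e.1 e.2 ∧ e.1 ∈ verts) →
    ∀ st : CSt, CInv E verts st →
    CInv E verts (sym'.foldl (fun st e => verts.foldl (cW e) st) st) := by
  intro sym'
  induction sym' with
  | nil => intro _ st hinv; exact hinv
  | cons e es ih =>
    intro hmem st hinv
    rw [List.foldl_cons]
    obtain ⟨he, he1⟩ := hmem e (by simp)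
    exact ih (fun x hx => hmem x (by simp [hx])) _
      (foldl_cW_cinv E verts e he he1 verts (fun _ h => h) st hinv)

lemma cRound_admin (verts : List (Int × Int)) :
    ∀ (sym' : List ((Int × Int) × (Int × Int))) (st : CSt),
    (st.ch = true → (sym'.foldl (fun st e => verts.foldl (cW e) st) st).ch = true) ∧
    st.ev.length + st.od.length
      ≤ (sym'.foldl (fun st e => verts.foldl (cW e) st) st).ev.length
        + (sym'.foldl (fun st e => verts.foldl (cW e) st) st).od.length ∧
    ((sym'.foldl (fun st e => verts.foldl (cW e) st) st).ch = false →
      (sym'.foldl (fun st e => verts.foldl (cW e) st) st = st ∧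
       ∀ e ∈ sym', ∀ w ∈ verts,
         ((e.2, w) ∈ st.ev → (e.1, w) ∈ st.od) ∧ ((e.2, w) ∈ st.od → (e.1, w) ∈ st.ev))) ∧
    (st.ch = false → (sym'.foldl (fun st e => verts.foldl (cW e) st) st).ch = true →
      st.ev.length + st.od.length
        < (sym'.foldl (fun st e => verts.foldl (cW e) st) st).ev.length
          + (sym'.foldl (fun st e => verts.foldl (cW e) st) st).od.length) := by
  intro sym'
  induction sym' with
  | nil =>
    intro st
    refine ⟨fun h => h, by simp, fun _ => ⟨by simp, by simp⟩, fun h1 h2 => ?_⟩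
    simp only [List.foldl_nil] at h2
    rw [h1] at h2
    cases h2
  | cons e es ih =>
    intro st
    rw [List.foldl_cons]
    obtain ⟨c1, c2, c3, c4⟩ := foldl_cW_admin e verts st
    obtain ⟨i1, i2, i3, i4⟩ := ih (verts.foldl (cW e) st)
    refine ⟨fun h => i1 (c1 h), le_trans c2 i2, ?_, ?_⟩
    · intro hf
      have hc : (verts.foldl (cW e) st).ch = false := by
        cases hc : (verts.foldl (cW e) st).ch
        · rfl
        · rw [i1 hc] at hf; cases hf
      obtain ⟨heq, hcond⟩ := c3 hc
      rw [heq] at hf ⊢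
      obtain ⟨j1, j2, j3, j4⟩ := ih st
      obtain ⟨heq2, hcond2⟩ := j3 hf
      refine ⟨heq2, ?_⟩
      intro x hx
      rcases List.mem_cons.mp hx with rfl | hx
      · exact hcond
      · exact hcond2 x hx
    · intro h0 ht
      cases hc : (verts.foldl (cW e) st).ch
      · obtain ⟨heq, _⟩ := c3 hc
        rw [heq] at ht ⊢
        exact (ih st).2.2.2 h0 ht
      · exact lt_of_lt_of_le (c4 h0 hc) i2

def Closed (sym : List ((Int × Int) × (Int × Int))) (verts : List (Int × Int))
    (ev od : PySem.Set ((Int × Int) × (Int × Int))) : Prop :=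
  ∀ e ∈ sym, ∀ w ∈ verts,
    ((e.2, w) ∈ ev → (e.1, w) ∈ od) ∧ ((e.2, w) ∈ od → (e.1, w) ∈ ev)

lemma pairs_bound (verts : List (Int × Int)) (l : List ((Int × Int) × (Int × Int)))
    (hn : l.Nodup) (hmem : ∀ q ∈ l, q.1 ∈ verts ∧ q.2 ∈ verts) :
    l.length ≤ verts.length * verts.length := by
  have hsub : l ⊆ verts ×ˢ verts := by
    intro q hq
    obtain ⟨h1, h2⟩ := hmem q hq
    rw [show q = (q.1, q.2) from rfl]
    exact List.pair_mem_product.mpr ⟨h1, h2⟩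
  have := (List.subperm_of_subset hn hsub).length_le
  rw [List.length_product] at this
  exact this

lemma cLoop_run (E : List ((Int × Int) × (Int × Int)))
    (sym : List ((Int × Int) × (Int × Int))) (verts : List (Int × Int))
    (hsym : ∀ e ∈ sym, AdjE E e.1 e.2 ∧ e.1 ∈ verts) :
    ∀ (fuel : Nat) (ev od : PySem.Set ((Int × Int) × (Int × Int))),
    CInv E verts ⟨ev, od, false⟩ →
    2 * (verts.length * verts.length) + 1 ≤ fuel + (ev.length + od.length) →
    CInv E verts ⟨(cLoop sym verts fuel (ev, od)).1, (cLoop sym verts fuel (ev, od)).2, false⟩ ∧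
    Closed sym verts (cLoop sym verts fuel (ev, od)).1 (cLoop sym verts fuel (ev, od)).2 := by
  intro fuel
  induction fuel with
  | zero =>
    intro ev od hinv hbound
    exfalso
    obtain ⟨hn1, hn2, hs1, hs2, _⟩ := hinv
    have b1 := pairs_bound verts ev hn1 (fun q hq => ⟨(hs1 q hq).2.1, (hs1 q hq).2.2⟩)
    have b2 := pairs_bound verts od hn2 (fun q hq => ⟨(hs2 q hq).2.1, (hs2 q hq).2.2⟩)
    omega
  | succ n ih =>
    intro ev od hinv hbound
    set R := List.foldl (fun st e => verts.foldl (cW e) st) (⟨ev, od, false⟩ : CSt) sym with hR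
    have hinv' : CInv E verts R := cRound_cinv E verts sym hsym _ hinv
    obtain ⟨_, a2, a3, a4⟩ := cRound_admin verts sym ⟨ev, od, false⟩
    rw [← hR] at a2 a3 a4
    have hloop : cLoop sym verts (n + 1) (ev, od)
        = (if R.ch then cLoop sym verts n (R.ev, R.od) else (R.ev, R.od)) := rfl
    cases hch : R.ch with
    | false =>
      obtain ⟨heq, hcond⟩ := a3 hch
      have hval : cLoop sym verts (n + 1) (ev, od) = (R.ev, R.od) := by
        rw [hloop]
        simp only [hch, if_false, Bool.false_eq_true]
      rw [hval, heq]
      exact ⟨hinv, hcond⟩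
    | true =>
      have hval : cLoop sym verts (n + 1) (ev, od) = cLoop sym verts n (R.ev, R.od) := by
        rw [hloop]
        simp only [hch, if_true]
      rw [hval]
      have hgrow := a4 rfl hch
      have hcinv2 : CInv E verts ⟨R.ev, R.od, false⟩ := by
        obtain ⟨x1, x2, x3, x4, x5⟩ := hinv'
        exact ⟨x1, x2, x3, x4, x5⟩
      exact ih R.ev R.od hcinv2 (by
        simp only [CSt.ev, CSt.od] at hgrow
        omega)

lemma closed_complete (E : List ((Int × Int) × (Int × Int)))
    (sym : List ((Int × Int) × (Int × Int))) (verts : List (Int × Int))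
    (hsym : ∀ u v, AdjE E u v → (u, v) ∈ sym)
    (ev od : PySem.Set ((Int × Int) × (Int × Int)))
    (hcl : Closed sym verts ev od) (hdiag : ∀ v ∈ verts, (v, v) ∈ ev) :
    ∀ (u w : Int × Int) (p : Bool), Walk E u w p → w ∈ verts →
      (u, w) ∈ (if p then od else ev) := by
  intro u w p hw
  induction hw with
  | nil =>
    intro hmem
    simpa using hdiag _ hmem
  | cons hadj hwalk ih =>
    rename_i a m z p
    intro hmem
    have hmem2 := ih hmem
    have hsm : (a, m) ∈ sym := hsym a m hadj
    obtain ⟨hc1, hc2⟩ := hcl (a, m) hsm z hmem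
    cases p with
    | false =>
      simp only [if_false, Bool.false_eq_true] at hmem2
      simpa using hc1 hmem2
    | true =>
      simp only [if_true] at hmem2
      simpa using hc2 hmem2

-- membership in B's vertex list = being an endpoint of the edge list
lemma mem_bVerts_iff (E : List ((Int × Int) × (Int × Int))) (x : Int × Int) :
    x ∈ bVerts (bSym E) ↔ x ∈ pvEndpoints E := by
  unfold bVerts bSym pvEndpoints
  rw [(PySem.List.sorted2_perm _ _ _ _).mem_iff, PySem.Set.mem_ofList]
  simp only [List.mem_flatMap, List.mem_append, List.mem_map, List.mem_cons,
    List.not_mem_nil, or_false]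
  constructor
  · rintro ⟨e, he | ⟨f, hf, rfl⟩, hx⟩
    · exact ⟨e, he, hx⟩
    · exact ⟨f, hf, hx.symm⟩
  · rintro ⟨e, he, hx⟩
    exact ⟨e, .inl he, hx⟩

lemma adj_of_mem_bSym (E : List ((Int × Int) × (Int × Int)))
    (e : (Int × Int) × (Int × Int)) (he : e ∈ bSym E) : AdjE E e.1 e.2 := by
  unfold bSym at he
  rcases List.mem_append.mp he with h | h
  · exact .inl (by rwa [Prod.mk.eta])
  · rw [List.mem_map] at h
    obtain ⟨f, hf, rfl⟩ := h
    exact .inr (by rwa [Prod.mk.eta])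

lemma mem_bSym_of_adj (E : List ((Int × Int) × (Int × Int))) (u v : Int × Int)
    (h : AdjE E u v) : (u, v) ∈ bSym E := by
  unfold bSym
  rcases h with h | h
  · exact List.mem_append.mpr (.inl h)
  · exact List.mem_append.mpr (.inr (List.mem_map.mpr ⟨(v, u), h, rfl⟩))

lemma endpoint_mem_bVerts (E : List ((Int × Int) × (Int × Int)))
    (e : (Int × Int) × (Int × Int)) (he : e ∈ bSym E) : e.1 ∈ bVerts (bSym E) := by
  rw [mem_bVerts_iff]
  unfold bSym at he
  rcases List.mem_append.mp he with h | h
  · exact List.mem_flatMap.mpr ⟨e, h, by simp⟩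
  · rw [List.mem_map] at h
    obtain ⟨f, hf, rfl⟩ := h
    exact List.mem_flatMap.mpr ⟨f, hf, by simp⟩

-- the final even/odd sets are exactly parity-reachability into the vertex set
lemma closure_char (E : List ((Int × Int) × (Int × Int))) :
    (∀ q : (Int × Int) × (Int × Int),
      q ∈ (cLoop (bSym E) (bVerts (bSym E))
            (2 * (bVerts (bSym E)).length * (bVerts (bSym E)).length + 1)
            (PySem.Set.ofList ((bVerts (bSym E)).map (fun v => (v, v))), PySem.Set.empty)).1
        ↔ (Walk E q.1 q.2 false ∧ q.2 ∈ bVerts (bSym E))) ∧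
    (∀ q : (Int × Int) × (Int × Int),
      q ∈ (cLoop (bSym E) (bVerts (bSym E))
            (2 * (bVerts (bSym E)).length * (bVerts (bSym E)).length + 1)
            (PySem.Set.ofList ((bVerts (bSym E)).map (fun v => (v, v))), PySem.Set.empty)).2
        ↔ (Walk E q.1 q.2 true ∧ q.2 ∈ bVerts (bSym E))) := by
  set verts := bVerts (bSym E) with hverts
  set ev0 := PySem.Set.ofList (verts.map (fun v => (v, v))) with hev0
  have hinit : CInv E verts ⟨ev0, PySem.Set.empty, false⟩ := by
    refine ⟨PySem.Set.nodup_ofList _, List.nodup_nil, ?_, ?_, ?_⟩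
    · intro q hq
      rw [hev0, PySem.Set.mem_ofList, List.mem_map] at hq
      obtain ⟨v, hv, rfl⟩ := hq
      exact ⟨Walk.nil v, hv, hv⟩
    · intro q hq; cases hq
    · intro v hv
      rw [hev0, PySem.Set.mem_ofList, List.mem_map]
      exact ⟨v, hv, rfl⟩
  have hsym : ∀ e ∈ bSym E, AdjE E e.1 e.2 ∧ e.1 ∈ verts :=
    fun e he => ⟨adj_of_mem_bSym E e he, endpoint_mem_bVerts E e he⟩
  obtain ⟨hres, hclosed⟩ := cLoop_run E (bSym E) verts hsym
    (2 * verts.length * verts.length + 1) ev0 PySem.Set.empty hinit (by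
      have : 2 * (verts.length * verts.length) = 2 * verts.length * verts.length := by ring
      omega)
  obtain ⟨_, _, hs1, hs2, hdiag0⟩ := hres
  have hdiag : ∀ v ∈ verts, (v, v) ∈ (cLoop (bSym E) verts
      (2 * verts.length * verts.length + 1) (ev0, PySem.Set.empty)).1 := hdiag0
  constructor
  · intro q
    constructor
    · intro hq
      exact ⟨(hs1 q hq).1, (hs1 q hq).2.2⟩
    · rintro ⟨hw, hm⟩
      have := closed_complete E (bSym E) verts (mem_bSym_of_adj E) _ _ hclosed hdiag
        q.1 q.2 false hw hm
      simpa using this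
  · intro q
    constructor
    · intro hq
      exact ⟨(hs2 q hq).1, (hs2 q hq).2.2⟩
    · rintro ⟨hw, hm⟩
      have := closed_complete E (bSym E) verts (mem_bSym_of_adj E) _ _ hclosed hdiag
        q.1 q.2 true hw hm
      simpa using this

-- ---------- Section 8: the per-order compatibility checks agree ----------
def pvCross (pos : PySem.Dict Int Int) (c1 c2 : Int × Int) : Bool :=
  let pa := min (pos.getD c1.1 0) (pos.getD c1.2 0)
  let pb := max (pos.getD c1.1 0) (pos.getD c1.2 0)
  let pc := min (pos.getD c2.1 0) (pos.getD c2.2 0)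
  let pd := max (pos.getD c2.1 0) (pos.getD c2.2 0)
  decide (pa < pc ∧ pc < pb ∧ pb < pd) || decide (pc < pa ∧ pa < pd ∧ pd < pb)

lemma pvCross_symm (pos : PySem.Dict Int Int) (c1 c2 : Int × Int) :
    pvCross pos c1 c2 = pvCross pos c2 c1 := by
  unfold pvCross
  exact Bool.or_comm _ _

lemma nodup4_symm (a b c d : Int) : [a, b, c, d].Nodup ↔ [c, d, a, b].Nodup := by
  constructor <;> (intro h; simp at h ⊢; tauto)

lemma setlen_nodup_iff (l : List Int) :
    (PySem.Set.len (PySem.Set.ofList l) = (l.length : Int)) ↔ l.Nodup := by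
  constructor
  · intro h
    have hsub : (PySem.Set.ofList l).Subperm l :=
      List.subperm_of_subset (PySem.Set.nodup_ofList l)
        (fun x hx => (PySem.Set.mem_ofList l x).mp hx)
    have hlen : l.length ≤ (PySem.Set.ofList l : List Int).length := by
      have : PySem.Set.len (PySem.Set.ofList l) = ((PySem.Set.ofList l : List Int).length : Int) := rfl
      omega
    have hperm := List.Subperm.perm_of_length_le hsub hlen
    exact hperm.nodup_iff.mp (PySem.Set.nodup_ofList l)
  · intro h
    rw [PySem.Set.ofList_eq_self_of_nodup l h]
    rfl

lemma bPairGood_eq (pos : PySem.Dict Int Int) (p : (Int × Int) × (Int × Int)) :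
    bPairGood pos p = (decide ([p.1.1, p.1.2, p.2.1, p.2.2].Nodup) && !(pvCross pos p.1 p.2)) := by
  by_cases hnd : [p.1.1, p.1.2, p.2.1, p.2.2].Nodup
  · rw [bPairGood, if_neg, decide_eq_true hnd, Bool.true_and]
    · rfl
    · rw [PySem.Set.ofList_eq_self_of_nodup _ hnd]
      simp [PySem.Set.len]
  · rw [bPairGood, if_pos, decide_eq_false hnd, Bool.false_and]
    have h1 : PySem.Set.len (PySem.Set.ofList [p.1.1, p.1.2, p.2.1, p.2.2]) ≠ (4 : Int) := by
      intro h
      exact hnd ((setlen_nodup_iff [p.1.1, p.1.2, p.2.1, p.2.2]).mp (by exact_mod_cast h))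
    have h2 := PySem.Set.length_ofList_le [p.1.1, p.1.2, p.2.1, p.2.2]
    have h3 : PySem.Set.len (PySem.Set.ofList [p.1.1, p.1.2, p.2.1, p.2.2])
        = ((PySem.Set.ofList [p.1.1, p.1.2, p.2.1, p.2.2] : List Int).length : Int) := rfl
    simp only [List.length_cons, List.length_nil] at h2
    omega

lemma usedOk_iff : ∀ (cls : List (Int × Int)), (∀ ch ∈ cls, ch.1 ≠ ch.2) → ∀ (used : PySem.Set Int),
    aUsedOk cls used = true ↔
      ((cls.flatMap (fun ch => [ch.1, ch.2])).Nodup ∧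
        ∀ x ∈ cls.flatMap (fun ch => [ch.1, ch.2]), x ∉ used) := by
  intro cls
  induction cls with
  | nil => intro _ used; simp [aUsedOk]
  | cons ch rest ih =>
    intro hlt used
    have ih := ih (fun c hc => hlt c (by simp [hc]))
    rw [show aUsedOk (ch :: rest) used
        = (if PySem.Set.contains used ch.1 || PySem.Set.contains used ch.2 then false
           else aUsedOk rest (PySem.Set.add (PySem.Set.add used ch.1) ch.2)) from rfl]
    by_cases hab : (PySem.Set.contains used ch.1 || PySem.Set.contains used ch.2) = true
    · rw [if_pos hab]
      simp only [Bool.false_eq_true, false_iff]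
      rintro ⟨_, hnotin⟩
      rcases Bool.or_eq_true_iff.mp hab with h | h
      · exact hnotin ch.1 (by simp) (List.contains_iff_mem.mp h)
      · exact hnotin ch.2 (by simp) (List.contains_iff_mem.mp h)
    · rw [if_neg hab]
      have h1 : ch.1 ∉ used := by
        intro hm; apply hab
        simp only [PySem.Set.contains, Bool.or_eq_true, List.contains_iff_mem]
        exact .inl hm
      have h2 : ch.2 ∉ used := by
        intro hm; apply hab
        simp only [PySem.Set.contains, Bool.or_eq_true, List.contains_iff_mem]
        exact .inr hm
      rw [ih]
      constructor
      · rintro ⟨hnd, hni⟩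
        have h12 : ch.1 ≠ ch.2 := hlt ch (by simp)
        have hnf1 : ch.1 ∉ rest.flatMap (fun ch => [ch.1, ch.2]) := by
          intro hm
          have := hni ch.1 hm
          rw [PySem.Set.mem_add, PySem.Set.mem_add] at this
          exact this (.inl (.inr rfl))
        have hnf2 : ch.2 ∉ rest.flatMap (fun ch => [ch.1, ch.2]) := by
          intro hm
          have := hni ch.2 hm
          rw [PySem.Set.mem_add, PySem.Set.mem_add] at this
          exact this (.inr rfl)
        refine ⟨by simp [List.nodup_cons, h12, hnf1, hnf2, hnd], ?_⟩
        intro x hx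
        rcases List.mem_cons.mp hx with rfl | hx2
        · exact h1
        · rcases List.mem_cons.mp hx2 with rfl | hx3
          · exact h2
          · intro hm
            have := hni x hx3
            rw [PySem.Set.mem_add, PySem.Set.mem_add] at this
            exact this (.inl (.inl hm))
      · rintro ⟨hnd, hni⟩
        simp only [List.flatMap_cons, List.cons_append, List.nil_append, List.nodup_cons] at hnd
        refine ⟨hnd.2.2, ?_⟩
        intro x hx hm
        rw [PySem.Set.mem_add, PySem.Set.mem_add] at hm
        rcases hm with (hm | rfl) | rfl
        · exact hni x (by simp [hx]) hm
        · exact hnd.1 (by simp [hx])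
        · exact hnd.2.1 hx

lemma flat_pair_nodup {cls : List (Int × Int)} {x y : Int × Int}
    (hnd : (cls.flatMap (fun ch => [ch.1, ch.2])).Nodup)
    (hsub : [x, y].Sublist cls) :
    [x.1, x.2, y.1, y.2].Nodup := by
  have h := (List.Sublist.flatMap hsub (fun ch => [ch.1, ch.2])).nodup hnd
  simpa using h

lemma sublist_pair_of_mem {α : Type} : ∀ {l : List α} {x y : α}, l.Nodup → x ∈ l → y ∈ l →
    x ≠ y → [x, y].Sublist l ∨ [y, x].Sublist l := by
  intro l
  induction l with
  | nil => intro x y _ hx _ _; cases hx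
  | cons a rest ih =>
    intro x y hnd hx hy hne
    rw [List.nodup_cons] at hnd
    rcases List.mem_cons.mp hx with rfl | hx2
    · rcases List.mem_cons.mp hy with rfl | hy2
      · exact absurd rfl hne
      · exact .inl (List.cons_sublist_cons.mpr (List.singleton_sublist.mpr hy2))
    · rcases List.mem_cons.mp hy with rfl | hy2
      · exact .inr (List.cons_sublist_cons.mpr (List.singleton_sublist.mpr hx2))
      · rcases ih hnd.2 hx2 hy2 hne with h | h
        · exact .inl (h.cons a)
        · exact .inr (h.cons a)

lemma flat_nodup_of_pairs : ∀ (cls : List (Int × Int)), cls.Nodup →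
    (∀ ch ∈ cls, ch.1 ≠ ch.2) →
    (∀ x ∈ cls, ∀ y ∈ cls, x ≠ y → [x.1, x.2, y.1, y.2].Nodup) →
    (cls.flatMap (fun ch => [ch.1, ch.2])).Nodup := by
  intro cls
  induction cls with
  | nil => intro _ _ _; simp
  | cons ch rest ih =>
    intro hnd hne hp
    rw [List.nodup_cons] at hnd
    have hstep : ∀ z : Int, (z = ch.1 ∨ z = ch.2) → z ∉ rest.flatMap (fun c => [c.1, c.2]) := by
      intro z hz hm
      rw [List.mem_flatMap] at hm
      obtain ⟨y, hy, hzy⟩ := hm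
      have hchy : ch ≠ y := fun h => hnd.1 (h ▸ hy)
      have h4 := hp ch (by simp) y (by simp [hy]) hchy
      simp only [List.mem_cons, List.not_mem_nil, or_false] at hzy
      rcases hz with rfl | rfl <;> rcases hzy with h | h <;> simp [h] at h4 <;> tauto
    simp only [List.flatMap_cons, List.cons_append, List.nil_append, List.nodup_cons]
    refine ⟨?_, ?_, ?_⟩
    · intro hm
      rcases List.mem_cons.mp hm with h | h
      · exact hne ch (by simp) h
      · exact hstep ch.1 (.inl rfl) h
    · exact hstep ch.2 (.inr rfl)
    · exact ih hnd.2 (fun c hc => hne c (by simp [hc]))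
        (fun x hx y hy => hp x (by simp [hx]) y (by simp [hy]))

lemma crossOk_eq_all (pos : PySem.Dict Int Int) :
    ∀ l : List (List (Int × Int)),
    aCrossOk pos l = l.all (fun pr =>
      !(aCrosses (PySem.List.pyGetD pr 0 (0, 0)) (PySem.List.pyGetD pr 1 (0, 0)) pos)) := by
  intro l
  induction l with
  | nil => rfl
  | cons pr rest ih =>
    rw [show aCrossOk pos (pr :: rest)
        = (if aCrosses (PySem.List.pyGetD pr 0 (0, 0)) (PySem.List.pyGetD pr 1 (0, 0)) pos then false
           else aCrossOk pos rest) from rfl]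
    by_cases h : aCrosses (PySem.List.pyGetD pr 0 (0, 0)) (PySem.List.pyGetD pr 1 (0, 0)) pos = true <;>
      simp [h, ih]

lemma aCrosses_not_nodup (pos : PySem.Dict Int Int) (c1 c2 : Int × Int)
    (h : ¬ [c1.1, c1.2, c2.1, c2.2].Nodup) : aCrosses c1 c2 pos = false := by
  rw [aCrosses, if_pos]
  have h1 : PySem.Set.len (PySem.Set.ofList [c1.1, c1.2, c2.1, c2.2]) ≠ (4 : Int) := by
    intro hl
    exact h ((setlen_nodup_iff _).mp (by exact_mod_cast hl))
  have h2 := PySem.Set.length_ofList_le [c1.1, c1.2, c2.1, c2.2]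
  have h3 : PySem.Set.len (PySem.Set.ofList [c1.1, c1.2, c2.1, c2.2])
      = ((PySem.Set.ofList [c1.1, c1.2, c2.1, c2.2] : List Int).length : Int) := rfl
  simp only [List.length_cons, List.length_nil] at h2
  omega

lemma crosses_eq_pointwise (pos : PySem.Dict Int Int) (c1 c2 : Int × Int)
    (hnd : [c1.1, c1.2, c2.1, c2.2].Nodup)
    (hpd : ([c1.1, c1.2, c2.1, c2.2].map (fun l => pos.getD l 0)).Nodup) :
    aCrosses c1 c2 pos = pvCross pos c1 c2 := by
  rw [aCrosses, if_neg]
  · rw [pvCross]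
    simp only [List.map_cons, List.map_nil, List.nodup_cons, List.mem_cons] at hpd
    set pa := pos.getD c1.1 0
    set pb := pos.getD c1.2 0
    set pc := pos.getD c2.1 0
    set pd := pos.getD c2.2 0
    have hab : pa ≠ pb := by tauto
    have hac : pa ≠ pc := by tauto
    have had : pa ≠ pd := by tauto
    have hbc : pb ≠ pc := by tauto
    have hbd : pb ≠ pd := by tauto
    have hcd : pc ≠ pd := by tauto
    have hbool : ∀ lo hi oc od : Int, lo < hi → oc ≠ od → lo ≠ oc → lo ≠ od → hi ≠ oc → hi ≠ od →
        ((decide (lo < oc ∧ oc < hi) != decide (lo < od ∧ od < hi))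
          = (decide (lo < min oc od ∧ min oc od < hi ∧ hi < max oc od)
             || decide (min oc od < lo ∧ lo < max oc od ∧ max oc od < hi))) := by
      intro lo hi oc od hlh hcd' hl1 hl2 hh1 hh2
      rcases le_total oc od with h2 | h2
      · rw [min_eq_left h2, max_eq_right h2]
        apply Bool.eq_iff_iff.mpr
        simp only [bne_iff_ne, ne_eq, decide_eq_decide, decide_eq_true_eq, Bool.or_eq_true]
        constructor <;> intro <;> omega
      · rw [min_eq_right h2, max_eq_left h2]
        apply Bool.eq_iff_iff.mpr
        simp only [bne_iff_ne, ne_eq, decide_eq_decide, decide_eq_true_eq, Bool.or_eq_true]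
        constructor <;> intro <;> omega
    by_cases h1 : pa > pb
    · simp only [h1, if_true]
      rw [show min pa pb = pb from min_eq_right (le_of_lt h1),
        show max pa pb = pa from max_eq_left (le_of_lt h1)]
      exact hbool pb pa pc pd (by omega) (by tauto) (by tauto) (by tauto) (by tauto) (by tauto)
    · simp only [h1, if_false]
      have h1' : pa < pb := by
        rcases lt_trichotomy pa pb with h | h | h
        · exact h
        · exact absurd h hab
        · exact absurd h h1
      rw [show min pa pb = pa from min_eq_left (le_of_lt h1'),
        show max pa pb = pb from max_eq_right (le_of_lt h1')]
      exact hbool pa pb pc pd h1' (by tauto) (by tauto) (by tauto) (by tauto) (by tauto)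
  · rw [PySem.Set.ofList_eq_self_of_nodup _ hnd]
    simp [PySem.Set.len]

lemma pvPos_getD_spec (o : List Int) (hnd : o.Nodup) (l : Int) (hl : l ∈ o) :
    ∃ k : Nat, k < o.length ∧ o[k]? = some l ∧ (pvPos o).getD l 0 = (k : Int) := by
  have hfresh : ∀ p ∈ PySem.List.enumerate o 0, (PySem.Dict.empty : PySem.Dict Int Int).contains p.2 = false :=
    fun p _ => PySem.Dict.contains_empty _
  have hkeymap : ((PySem.List.enumerate o 0).map (fun p => p.2)).Nodup := by
    rw [PySem.List.map_snd_enumerate]; exact hnd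
  have hitems : (pvPos o).items
      = (PySem.Dict.empty : PySem.Dict Int Int).items
          ++ (PySem.List.enumerate o 0).map (fun p => (p.2, p.1)) := by
    unfold pvPos
    exact PySem.Dict.items_foldl_insert_fresh (PySem.List.enumerate o 0)
      (fun p => p.2) (fun p => p.1) PySem.Dict.empty hfresh hkeymap
  have hkeys : (pvPos o).keys = o := by
    show (pvPos o).items.map (·.1) = o
    rw [hitems]
    have hie : (PySem.Dict.empty : PySem.Dict Int Int).items = [] := rfl
    simp only [hie, List.nil_append, List.map_map]
    rw [show ((fun p : Int × Int => p.1) ∘ (fun p : Int × Int => (p.2, p.1))) = (fun p : Int × Int => p.2) from rfl]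
    exact PySem.List.map_snd_enumerate o 0
  have hkeysnd : (pvPos o).keys.Nodup := by rw [hkeys]; exact hnd
  obtain ⟨k, hk, hok⟩ := List.getElem_of_mem hl
  have hmem : ((0 : Int) + k, o[k]) ∈ PySem.List.enumerate o 0 :=
    (PySem.List.mem_enumerate_iff o 0 _).mpr ⟨k, hk, rfl⟩
  have hget : (pvPos o).get? l = some (k : Int) := by
    rw [PySem.Dict.get?_eq_some_iff_mem_items _ _ _ hkeysnd, hitems]
    have hie : (PySem.Dict.empty : PySem.Dict Int Int).items = [] := rfl
    simp only [hie, List.nil_append, List.mem_map]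
    exact ⟨((0 : Int) + k, o[k]), hmem, by simp [hok]⟩
  exact ⟨k, hk, by rw [List.getElem?_eq_getElem hk, hok], by rw [PySem.Dict.getD_eq_get?_getD, hget]; rfl⟩

lemma pvPos_inj (o : List Int) (hnd : o.Nodup) (l1 l2 : Int)
    (h1 : l1 ∈ o) (h2 : l2 ∈ o) (hne : l1 ≠ l2) :
    (pvPos o).getD l1 0 ≠ (pvPos o).getD l2 0 := by
  obtain ⟨k1, hk1, ho1, he1⟩ := pvPos_getD_spec o hnd l1 h1
  obtain ⟨k2, hk2, ho2, he2⟩ := pvPos_getD_spec o hnd l2 h2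
  rw [he1, he2]
  intro h
  have : k1 = k2 := by exact_mod_cast h
  rw [this, ho2] at ho1
  exact hne (Option.some_injective _ ho1).symm

lemma order_facts (o : List Int) (ho : o ∈ pvNormOrders) :
    o.Nodup ∧ ∀ l : Int, 0 ≤ l → l < 8 → l ∈ o := by
  unfold pvNormOrders at ho
  rw [List.mem_filterMap] at ho
  obtain ⟨tail, htail, hcond⟩ := ho
  have hlen : (PySem.List.pyRange 1 8 1).length = 7 := rfl
  rw [← hlen] at htail
  have hperm := PySem.List.perm_of_mem_permutations htail
  have ho' : o = 0 :: tail := by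
    by_cases hc : PySem.List.pyGetD (0 :: tail) 1 0 < PySem.List.pyGetD (0 :: tail) (-1) 0
    · simp only [hc, if_true] at hcond
      exact (Option.some_injective _ hcond).symm
    · simp only [hc, if_false] at hcond
      cases hcond
  subst ho'
  have hmemt : ∀ l : Int, l ∈ tail ↔ (1 ≤ l ∧ l < 8) := by
    intro l
    rw [hperm.mem_iff, PySem.List.mem_pyRange_one]
  constructor
  · rw [List.nodup_cons]
    refine ⟨fun hm => by have := (hmemt 0).mp hm; omega, ?_⟩
    exact hperm.nodup_iff.mpr (PySem.List.nodup_pyRange_one 1 8)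
  · intro l h0 h8
    rcases eq_or_lt_of_le h0 with h | h
    · exact List.mem_cons.mpr (.inl h.symm)
    · exact List.mem_cons.mpr (.inr ((hmemt l).mpr ⟨by omega, h8⟩))

lemma bLexLt_ne {u v : Int × Int} (h : bLexLt u v = true) : u ≠ v := by
  rw [bLexLt, decide_eq_true_eq] at h
  intro he
  subst he
  rcases h with h | h
  · omega
  · omega

lemma bLexLt_total (u v : Int × Int) (h : u ≠ v) :
    bLexLt u v = true ∨ bLexLt v u = true := by
  rw [bLexLt, bLexLt, decide_eq_true_eq, decide_eq_true_eq]
  have : u.1 ≠ v.1 ∨ u.2 ≠ v.2 := by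
    by_contra hc
    push_neg at hc
    exact h (Prod.ext hc.1 hc.2)
  omega

lemma exists_other {α : Type} {l : List α} {u : α} (hnd : l.Nodup) (hlen : 2 ≤ l.length)
    (hu : u ∈ l) : ∃ v ∈ l, v ≠ u := by
  match l, hlen with
  | a :: b :: t, _ =>
    rw [List.nodup_cons] at hnd
    by_cases ha : a = u
    · subst ha
      exact ⟨b, by simp, fun h => hnd.1 (by rw [← h]; simp)⟩
    · exact ⟨a, by simp, ha⟩

lemma classOk_iff (pos : PySem.Dict Int Int) (cls : List (Int × Int)) (hnd : cls.Nodup)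
    (hch : ∀ ch ∈ cls, ch.1 ≠ ch.2)
    (hsymm : ∀ x ∈ cls, ∀ y ∈ cls, aCrosses x y pos = aCrosses y x pos) :
    (aUsedOk cls PySem.Set.empty = true ∧ aCrossOk pos (PySem.List.combinations cls 2) = true)
    ↔ ∀ x ∈ cls, ∀ y ∈ cls, x ≠ y → ([x.1, x.2, y.1, y.2].Nodup ∧ aCrosses x y pos = false) := by
  constructor
  · rintro ⟨hu, hc⟩
    have hflat := ((usedOk_iff cls hch PySem.Set.empty).mp hu).1
    rw [crossOk_eq_all] at hc
    have hcall := List.all_eq_true.mp hc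
    intro x hx y hy hne
    have hxy : ∀ a b : Int × Int, [a, b].Sublist cls →
        [a.1, a.2, b.1, b.2].Nodup ∧ aCrosses a b pos = false := by
      intro a b hsub
      refine ⟨flat_pair_nodup hflat hsub, ?_⟩
      have hmemc : [a, b] ∈ PySem.List.combinations cls 2 :=
        (PySem.List.mem_combinations_iff cls 2 [a, b]).mpr ⟨hsub, rfl⟩
      have := hcall [a, b] hmemc
      have hga : PySem.List.pyGetD [a, b] 0 ((0 : Int), (0 : Int)) = a := rfl
      have hgb : PySem.List.pyGetD [a, b] 1 ((0 : Int), (0 : Int)) = b := rfl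
      rw [hga, hgb] at this
      simpa using this
    rcases sublist_pair_of_mem hnd hx hy hne with h | h
    · exact hxy x y h
    · obtain ⟨hnd4, hcr⟩ := hxy y x h
      refine ⟨(nodup4_symm _ _ _ _).mp hnd4, ?_⟩
      rw [hsymm x hx y hy]
      exact hcr
  · intro hp
    have hflat : (cls.flatMap (fun ch => [ch.1, ch.2])).Nodup :=
      flat_nodup_of_pairs cls hnd hch (fun x hx y hy hne => (hp x hx y hy hne).1)
    constructor
    · rw [usedOk_iff cls hch PySem.Set.empty]
      exact ⟨hflat, fun x _ hm => by cases hm⟩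
    · rw [crossOk_eq_all, List.all_eq_true]
      intro pr hpr
      obtain ⟨hsub, hlen2⟩ := (PySem.List.mem_combinations_iff cls 2 pr).mp hpr
      obtain ⟨x, y, rfl⟩ : ∃ x y, pr = [x, y] := by
        match pr, hlen2 with
        | [x, y], _ => exact ⟨x, y, rfl⟩
      have hx : x ∈ cls := hsub.subset (by simp)
      have hy : y ∈ cls := hsub.subset (by simp)
      have hne : x ≠ y := by
        have := hsub.nodup hnd
        rw [List.nodup_cons] at this
        exact fun h => this.1 (by rw [h]; simp)
      have hga : PySem.List.pyGetD [x, y] 0 ((0 : Int), (0 : Int)) = x := rfl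
      have hgb : PySem.List.pyGetD [x, y] 1 ((0 : Int), (0 : Int)) = y := rfl
      rw [hga, hgb, (hp x hx y hy hne).2]
      rfl

lemma aClassesOk_iff (pos : PySem.Dict Int Int) :
    ∀ classes : List (List (Int × Int)),
    aClassesOk pos classes = true ↔ ∀ cls ∈ classes,
      (aUsedOk cls PySem.Set.empty = true ∧ aCrossOk pos (PySem.List.combinations cls 2) = true) := by
  intro classes
  induction classes with
  | nil => simp [aClassesOk]
  | cons cls rest ih =>
    rw [show aClassesOk pos (cls :: rest)
        = (if aUsedOk cls PySem.Set.empty = false then false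
           else if aCrossOk pos (PySem.List.combinations cls 2) = false then false
           else aClassesOk pos rest) from rfl]
    by_cases h1 : aUsedOk cls PySem.Set.empty = false
    · rw [if_pos h1]
      simp only [Bool.false_eq_true, false_iff]
      intro hall
      have := (hall cls (by simp)).1
      rw [this] at h1
      cases h1
    · rw [if_neg h1]
      rw [Bool.not_eq_false] at h1
      by_cases h2 : aCrossOk pos (PySem.List.combinations cls 2) = false
      · rw [if_pos h2]
        simp only [Bool.false_eq_true, false_iff]
        intro hall
        have := (hall cls (by simp)).2
        rw [this] at h2
        cases h2
      · rw [if_neg h2]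
        rw [Bool.not_eq_false] at h2
        rw [ih]
        constructor
        · intro hall c hc
          rcases List.mem_cons.mp hc with rfl | hc
          · exact ⟨h1, h2⟩
          · exact hall c hc
        · intro hall c hc
          exact hall c (by simp [hc])

lemma per_order (E : List ((Int × Int) × (Int × Int)))
    (hC8 : ∀ c ∈ pvEndpoints E, InC8 c)
    (classes : List (List (Int × Int)))
    (hN : ∀ cls ∈ classes, cls.Nodup ∧ 2 ≤ cls.length)
    (hS : ∀ cls ∈ classes, ∀ u ∈ cls, ∀ v ∈ cls, u ≠ v → Walk E u v false)
    (hC : ∀ u v, u ≠ v → (Walk E u v false ↔ PairIn classes u v))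
    (pairs : List ((Int × Int) × (Int × Int)))
    (hP : ∀ q, q ∈ pairs ↔ (bLexLt q.1 q.2 = true ∧ Walk E q.1 q.2 false))
    (o : List Int) (ho : o ∈ pvNormOrders) :
    aClassesOk (pvPos o) classes = pairs.all (bPairGood (pvPos o)) := by
  obtain ⟨hond, homem⟩ := order_facts o ho
  have hinC8 : ∀ cls ∈ classes, ∀ ch ∈ cls, InC8 ch := by
    intro cls hcls ch hchm
    obtain ⟨hclsnd, hlen2⟩ := hN cls hcls
    obtain ⟨v, hv, hvne⟩ := exists_other hclsnd hlen2 hchm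
    have hw := hS cls hcls ch hchm v hv (fun h => hvne h.symm)
    rcases walk_endpoints hw with ⟨_, heq⟩ | ⟨hm, _⟩
    · exact absurd heq.symm hvne
    · exact hC8 ch hm
  have hlbl : ∀ u v : Int × Int, InC8 u → InC8 v → [u.1, u.2, v.1, v.2].Nodup →
      ([u.1, u.2, v.1, v.2].map (fun l => (pvPos o).getD l 0)).Nodup := by
    intro u v hu hv hnd4
    have hin : ∀ l ∈ [u.1, u.2, v.1, v.2], l ∈ o := by
      intro l hl
      simp only [List.mem_cons, List.not_mem_nil, or_false] at hl
      obtain ⟨a1, a2, a3⟩ := hu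
      obtain ⟨b1, b2, b3⟩ := hv
      rcases hl with rfl | rfl | rfl | rfl
      · exact homem u.1 a1 (by omega)
      · exact homem u.2 (by omega) a3
      · exact homem v.1 b1 (by omega)
      · exact homem v.2 (by omega) b3
    apply List.Nodup.map_on ?_ hnd4
    intro a ha b hb hab
    by_contra hne
    exact pvPos_inj o hond a b (hin a ha) (hin b hb) hne hab
  have hsymm : ∀ u v : Int × Int, InC8 u → InC8 v →
      aCrosses u v (pvPos o) = aCrosses v u (pvPos o) := by
    intro u v hu hv
    by_cases hnd4 : [u.1, u.2, v.1, v.2].Nodup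
    · rw [crosses_eq_pointwise _ u v hnd4 (hlbl u v hu hv hnd4),
        crosses_eq_pointwise _ v u ((nodup4_symm _ _ _ _).mp hnd4)
          (hlbl v u hv hu ((nodup4_symm _ _ _ _).mp hnd4)),
        pvCross_symm]
    · rw [aCrosses_not_nodup _ u v hnd4,
        aCrosses_not_nodup _ v u (fun h => hnd4 ((nodup4_symm _ _ _ _).mp h))]
  rw [Bool.eq_iff_iff]
  rw [aClassesOk_iff]
  constructor
  · intro hA
    rw [List.all_eq_true]
    intro q hq
    obtain ⟨hlex, hw⟩ := (hP q).mp hq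
    have hne := bLexLt_ne hlex
    obtain ⟨cls, hcls, hq1, hq2⟩ := (hC q.1 q.2 hne).mp hw
    obtain ⟨hclsnd, _⟩ := hN cls hcls
    have hcls8 := hinC8 cls hcls
    have hthis := (classOk_iff (pvPos o) cls hclsnd
        (fun ch hch => ne_of_lt (hcls8 ch hch).2.1)
        (fun x hx y hy => hsymm x y (hcls8 x hx) (hcls8 y hy))).mp (hA cls hcls)
        q.1 hq1 q.2 hq2 hne
    obtain ⟨hnd4, hcr⟩ := hthis
    rw [bPairGood_eq, decide_eq_true hnd4, Bool.true_and,
      ← crosses_eq_pointwise _ q.1 q.2 hnd4 (hlbl _ _ (hcls8 _ hq1) (hcls8 _ hq2) hnd4), hcr]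
    rfl
  · intro hB cls hcls
    obtain ⟨hclsnd, hlen2⟩ := hN cls hcls
    have hcls8 := hinC8 cls hcls
    rw [classOk_iff (pvPos o) cls hclsnd
        (fun ch hch => ne_of_lt (hcls8 ch hch).2.1)
        (fun x hx y hy => hsymm x y (hcls8 x hx) (hcls8 y hy))]
    intro x hx y hy hne
    have hw : Walk E x y false := hS cls hcls x hx y hy hne
    rcases bLexLt_total x y hne with hlex | hlex
    · have hq : (x, y) ∈ pairs := (hP (x, y)).mpr ⟨hlex, hw⟩
      have := List.all_eq_true.mp hB _ hq
      rw [bPairGood_eq, Bool.and_eq_true, decide_eq_true_eq] at this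
      obtain ⟨hnd4, hcr⟩ := this
      refine ⟨hnd4, ?_⟩
      rw [crosses_eq_pointwise _ x y hnd4 (hlbl _ _ (hcls8 _ hx) (hcls8 _ hy) hnd4)]
      simpa using hcr
    · have hq : (y, x) ∈ pairs := (hP (y, x)).mpr ⟨hlex, walk_symm hw⟩
      have := List.all_eq_true.mp hB _ hq
      rw [bPairGood_eq, Bool.and_eq_true, decide_eq_true_eq] at this
      obtain ⟨hnd4, hcr⟩ := this
      have hnd4' : [x.1, x.2, y.1, y.2].Nodup := (nodup4_symm _ _ _ _).mp hnd4
      refine ⟨hnd4', ?_⟩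
      rw [crosses_eq_pointwise _ x y hnd4' (hlbl _ _ (hcls8 _ hx) (hcls8 _ hy) hnd4'),
        pvCross_symm]
      simpa using hcr

lemma orderLoop_eq (classes : List (List (Int × Int)))
    (pairs : List ((Int × Int) × (Int × Int)))
    (h : ∀ o ∈ pvNormOrders, aClassesOk (pvPos o) classes = pairs.all (bPairGood (pvPos o))) :
    ∀ os : List (List Int), (∀ o ∈ os, o ∈ pvNormOrders) →
    aOrderLoop classes os = !(os.any (fun o => pairs.all (bPairGood (pvPos o)))) := by
  intro os
  induction os with
  | nil => intro _; rfl
  | cons o os ih =>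
    intro hos
    have heq := h o (hos o (by simp))
    rw [show aOrderLoop classes (o :: os)
        = (if aClassesOk (pvPos o) classes = true then false else aOrderLoop classes os) from rfl]
    by_cases hc : aClassesOk (pvPos o) classes = true
    · rw [if_pos hc]
      simp [List.any_cons, ← heq, hc]
    · rw [if_neg hc, ih (fun o' ho' => hos o' (by simp [ho']))]
      simp [List.any_cons, ← heq, Bool.eq_false_iff.mpr hc]

-- ===== VERDICT (by name: the statement is the Claim_ definition above) =====
theorem cyclic_order_kill_spec : Claim_equal_cyclic_order_kill := by
  intro rows _ hpre
  unfold Spec_cyclic_order_kill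
  have hA0 : cyclic_order_kill rows
      = (if (aOuter (aGraph (bEdges rows)) (2 * (bEdges rows).length + 2) pvChords PySem.Dict.empty []).1 = false
         then true
         else aOrderLoop (aOuter (aGraph (bEdges rows)) (2 * (bEdges rows).length + 2) pvChords PySem.Dict.empty []).2 pvNormOrders) := by
    unfold cyclic_order_kill
    rw [edges_eq]
  obtain ⟨hAiff, hAtrue⟩ := A_main rows hpre
  obtain ⟨hevch, hodch⟩ := closure_char (bEdges rows)
  have hC8 := endpoints_C8 rows hpre
  set E := bEdges rows with hE
  set res := aOuter (aGraph E) (2 * E.length + 2) pvChords PySem.Dict.empty [] with hres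
  set verts := bVerts (bSym E) with hverts
  set cres := cLoop (bSym E) verts (2 * verts.length * verts.length + 1)
      (PySem.Set.ofList (verts.map (fun v => (v, v))), PySem.Set.empty) with hcres
  have hB0 : cyclic_order_kill_alt rows
      = (if verts.any (fun v => PySem.Set.contains cres.2 (v, v)) then true
         else !(pvNormOrders.any (fun o => (bPairs verts cres.1).all (bPairGood (pvPos o))))) := rfl
  by_cases hodd : OddSelf E
  · have hA1 : res.1 = false := hAiff.mpr hodd
    have hBodd : verts.any (fun v => PySem.Set.contains cres.2 (v, v)) = true := by
      obtain ⟨v, hw⟩ := hodd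
      have hvmem : v ∈ verts := by
        rw [hverts, mem_bVerts_iff]
        rcases walk_endpoints hw with ⟨hf, _⟩ | ⟨hm, _⟩
        · cases hf
        · exact hm
      rw [List.any_eq_true]
      exact ⟨v, hvmem, (PySem.Set.contains_iff _ _).mpr ((hodch (v, v)).mpr ⟨hw, hvmem⟩)⟩
    rw [hA0, hB0, if_pos hA1, if_pos hBodd]
  · have hA1 : res.1 = true := by
      cases h : res.1
      · exact absurd (hAiff.mp h) hodd
      · rfl
    obtain ⟨hN, hchar⟩ := hAtrue hA1
    have hBodd : verts.any (fun v => PySem.Set.contains cres.2 (v, v)) = false := by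
      rw [← Bool.not_eq_true, List.any_eq_true]
      rintro ⟨v, _, hcont⟩
      exact hodd ⟨v, ((hodch (v, v)).mp ((PySem.Set.contains_iff _ _).mp hcont)).1⟩
    have hP : ∀ q : (Int × Int) × (Int × Int),
        q ∈ bPairs verts cres.1 ↔ (bLexLt q.1 q.2 = true ∧ Walk E q.1 q.2 false) := by
      intro q
      constructor
      · intro hq
        rw [bPairs, List.mem_flatMap] at hq
        obtain ⟨u, hu, hq2⟩ := hq
        rw [List.mem_map] at hq2
        obtain ⟨v, hv, rfl⟩ := hq2
        rw [List.mem_filter, Bool.and_eq_true] at hv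
        exact ⟨hv.2.1, ((hevch (u, v)).mp ((PySem.Set.contains_iff _ _).mp hv.2.2)).1⟩
      · rintro ⟨hlex, hw⟩
        have hne := bLexLt_ne hlex
        rcases walk_endpoints hw with ⟨_, heq⟩ | ⟨hm1, hm2⟩
        · exact absurd heq hne
        rw [bPairs, List.mem_flatMap]
        refine ⟨q.1, by rw [hverts, mem_bVerts_iff]; exact hm1, ?_⟩
        rw [List.mem_map]
        have hv2 : q.2 ∈ verts := by rw [hverts, mem_bVerts_iff]; exact hm2
        refine ⟨q.2, ?_, Prod.mk.eta⟩
        rw [List.mem_filter]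
        refine ⟨hv2, ?_⟩
        rw [Bool.and_eq_true]
        refine ⟨hlex, (PySem.Set.contains_iff _ _).mpr ?_⟩
        rw [Prod.mk.eta]
        exact (hevch q).mpr ⟨hw, hv2⟩
    have hS : ∀ cls ∈ res.2, ∀ u ∈ cls, ∀ v ∈ cls, u ≠ v → Walk E u v false := by
      intro cls hcls u hu v hv hne
      exact (hchar u v hne).mpr ⟨cls, hcls, hu, hv⟩
    have hloops := orderLoop_eq res.2 (bPairs verts cres.1)
      (fun o ho => per_order E hC8 res.2 hN hS hchar (bPairs verts cres.1) hP o ho)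
      pvNormOrders (fun _ ho => ho)
    rw [hA0, hB0, if_neg (by rw [hA1]; simp), if_neg (by rw [hBodd]; simp), hloops]
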